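-- pv_equiv track=rewrite | github.com/baiwan-chenhao/rewrite | leetcode_gen_week4.py | solve
-- ===== SOURCE A (Python) =====
-- from typing import List, Tuple
--
-- def solve(moveTime: List[List[int]]) -> int:
--     from heapq import heappop, heappush
--     # Dijkstra，并允许同一个节点的重复访问
--     dirs = [(-1, 0), (1, 0), (0, -1), (0, 1)]
--     # 最小堆，存储元组 (t, x, y)，表示到达 (x, y) 的时间为 t
--     heap = [(0, 0, 0)]
--
--     n, m = len(moveTime), len(moveTime[0])
--     # time[i][j]表示到达(i,j)的最少时间
--     time = [[-1] * m for _ in range(n)]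
--     time[0][0] = 0  # 初始化
--
--     # 当右下角未被访问时
--     while time[-1][-1] == -1:
--         t, x, y = heappop(heap)
--         for dx, dy in dirs:
--             nx, ny = x + dx, y + dy
--             if 0 <= nx < n and 0 <= ny < m and time[nx][ny] == -1:
--                 new_time = max(t, moveTime[nx][ny]) + 1
--                 time[nx][ny] = new_time
--                 heappush(heap, (new_time, nx, ny))
--
--     return time[n - 1][m - 1]  # 终点
-- ===== SOURCE B (Python) =====
-- def solve(moveTime):
--     # Bellman-Ford style value iteration (Jacobi rounds) instead of a Dijkstra heap.
--     n, m = len(moveTime), len(moveTime[0])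
--     dist = [[None] * m for _ in range(n)]
--     dist[0][0] = 0
--     for _ in range(n * m):
--         new = []
--         for i in range(n):
--             row = []
--             for j in range(m):
--                 if i == 0 and j == 0:
--                     row.append(0)
--                     continue
--                 best = None
--                 for x, y in ((i - 1, j), (i + 1, j), (i, j - 1), (i, j + 1)):
--                     if 0 <= x < n and 0 <= y < m and dist[x][y] is not None:
--                         c = max(dist[x][y], moveTime[i][j]) + 1
--                         if best is None or c < best:
--                             best = c
--                 row.append(best)
--             new.append(row)
--         if new == dist:
--             break
--         dist = new
--     return dist[n - 1][m - 1]
-- ===== Notes on version B (the rewrite author's own statement) =====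
-- stated objective: alternative
-- what changed: Replaced the heap-based Dijkstra (settle-once priority queue) by a Bellman-Ford value iteration: Jacobi rounds that recompute every cell's distance from its neighbours' previous-round values until a fixpoint (at most n*m rounds), with no heap and no visited bookkeeping. Pre_ excludes grids with a row shorter than the first row, on which A can return (when the missing cells are never probed before the goal is reached) while B's full-matrix relaxation raises IndexError; empty grids, on which both raise, are excluded too.
-- outside the precondition, e.g. on solve([[0, 100, 100], [0, 100], [0, 0, 0]]): A returns 4, B raises IndexError
import Mathlib
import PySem

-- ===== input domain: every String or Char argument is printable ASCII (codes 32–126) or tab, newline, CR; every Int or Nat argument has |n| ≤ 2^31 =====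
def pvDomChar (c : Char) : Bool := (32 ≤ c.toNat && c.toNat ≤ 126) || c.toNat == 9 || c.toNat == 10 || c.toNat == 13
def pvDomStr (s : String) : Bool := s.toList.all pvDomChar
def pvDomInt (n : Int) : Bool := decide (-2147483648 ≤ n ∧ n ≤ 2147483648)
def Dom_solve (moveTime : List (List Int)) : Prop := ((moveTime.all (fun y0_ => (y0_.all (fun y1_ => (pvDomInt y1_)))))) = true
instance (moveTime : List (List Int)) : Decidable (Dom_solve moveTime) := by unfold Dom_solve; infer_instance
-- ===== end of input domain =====

-- B replaces A's heap-based Dijkstra by a Jacobi (Bellman-Ford) value iteration over the whole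
-- grid (no priority queue, no settle-once bookkeeping); equal return value on Pre_solve, proved
-- via the characterisation "result = minimum cost over walks from (0,0)".


-- ===== PORT A =====
-- Python tuple comparison (t, x, y) < (t', x', y') on ints, as used by heapq.
def pvLexLt (a b : Int × Int × Int) : Bool :=
  a.1 < b.1 || (a.1 == b.1 && (a.2.1 < b.2.1 || (a.2.1 == b.2.1 && a.2.2 < b.2.2)))

-- heapq replacement: pops a lexicographically minimal tuple and returns the rest.
-- Extensionally exact for A: heappop returns the unique minimal tuple of the heap's
-- multiset (the pushed tuples are pairwise distinct since each pushed cell is fresh),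
-- and heappush only adds to the multiset.
def pvPopMin : List (Int × Int × Int) → Option ((Int × Int × Int) × List (Int × Int × Int))
  | [] => none
  | x :: xs =>
    match pvPopMin xs with
    | none => some (x, [])
    | some (y, ys) => if pvLexLt y x then some (y, x :: ys) else some (x, xs)

def pvGetT (tm : List (List Int)) (i j : Nat) : Int := (tm.getD i []).getD j (-1)

def pvSetT (tm : List (List Int)) (i j : Nat) (v : Int) : List (List Int) :=
  tm.set i ((tm.getD i []).set j v)

def pvDirs : List (Int × Int) := [(-1, 0), (1, 0), (0, -1), (0, 1)]

-- body of A's `for dx, dy in dirs` relaxation, state = (heap, time)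
def pvRelax (mo : List (List Int)) (n m : Nat) (t x y : Int)
    (st : List (Int × Int × Int) × List (List Int)) (d : Int × Int) :
    List (Int × Int × Int) × List (List Int) :=
  let nx := x + d.1
  let ny := y + d.2
  if 0 ≤ nx ∧ nx < (n : Int) ∧ 0 ≤ ny ∧ ny < (m : Int) ∧ pvGetT st.2 nx.toNat ny.toNat = -1 then
    let nt := max t ((mo.getD nx.toNat []).getD ny.toNat 0) + 1
    ((nt, nx, ny) :: st.1, pvSetT st.2 nx.toNat ny.toNat nt)
  else st

-- A's `while time[-1][-1] == -1` loop; `time[-1][-1] = time[n-1][m-1]` since the matrix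
-- always has n ≥ 1 rows of m ≥ 1 entries under Pre_solve.  Fuel n*m+1 suffices (proved);
-- the `none` branch is Python's IndexError on an empty heap, unreachable under Pre_solve.
def pvLoopA (mo : List (List Int)) (n m : Nat) :
    Nat → List (Int × Int × Int) → List (List Int) → List (List Int)
  | 0, _, tm => tm
  | fuel + 1, heap, tm =>
    if pvGetT tm (n - 1) (m - 1) = -1 then
      match pvPopMin heap with
      | none => tm
      | some ((t, x, y), rest) =>
        let st := pvDirs.foldl (pvRelax mo n m t x y) (rest, tm)
        pvLoopA mo n m fuel st.1 st.2
    else tm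

def solve (moveTime : List (List Int)) : Int :=
  let n := moveTime.length
  let m := (moveTime.headD []).length
  let tm0 := List.replicate n (List.replicate m (-1 : Int))
  let tm1 := pvSetT tm0 0 0 0
  let tmf := pvLoopA moveTime n m (n * m + 1) [(0, 0, 0)] tm1
  pvGetT tmf (n - 1) (m - 1)

-- ===== PORT B =====
def pvEntry (d : List (List (Option Int))) (i j : Nat) : Option Int := (d.getD i []).getD j none

-- body of B's inner `for x, y in (...)` accumulation of `best`
def pvCand (mo : List (List Int)) (n m : Nat) (d : List (List (Option Int))) (i j : Nat)
    (best : Option Int) (p : Int × Int) : Option Int :=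
  if 0 ≤ p.1 ∧ p.1 < (n : Int) ∧ 0 ≤ p.2 ∧ p.2 < (m : Int) then
    match pvEntry d p.1.toNat p.2.toNat with
    | none => best
    | some dv =>
      let c := max dv ((mo.getD i []).getD j 0) + 1
      match best with
      | none => some c
      | some b => if c < b then some c else some b
  else best

def pvNbrs (i j : Nat) : List (Int × Int) :=
  [((i : Int) - 1, (j : Int)), ((i : Int) + 1, (j : Int)),
   ((i : Int), (j : Int) - 1), ((i : Int), (j : Int) + 1)]

def pvBest (mo : List (List Int)) (n m : Nat) (d : List (List (Option Int))) (i j : Nat) :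
    Option Int :=
  (pvNbrs i j).foldl (pvCand mo n m d i j) none

-- one Jacobi round: recompute every cell from the previous matrix
def pvStepB (mo : List (List Int)) (n m : Nat) (d : List (List (Option Int))) :
    List (List (Option Int)) :=
  (List.range n).map (fun i => (List.range m).map (fun j =>
    if i = 0 ∧ j = 0 then some 0 else pvBest mo n m d i j))

-- B's `for _ in range(n*m)` with the `if new == dist: break` early exit
def pvLoopB (mo : List (List Int)) (n m : Nat) :
    Nat → List (List (Option Int)) → List (List (Option Int))
  | 0, d => d
  | k + 1, d =>
    let nd := pvStepB mo n m d
    if nd = d then d else pvLoopB mo n m k nd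

def solve_alt (moveTime : List (List Int)) : Int :=
  let n := moveTime.length
  let m := (moveTime.headD []).length
  let d0 := (List.replicate n (List.replicate m (none : Option Int))).set 0
      ((List.replicate m (none : Option Int)).set 0 (some 0))
  let df := pvLoopB moveTime n m (n * m) d0
  ((df.getD (n - 1) []).getD (m - 1) none).getD 0
  -- the final entry is proved to be `some t` under Pre_solve; Python returns that int t

-- ===== PRECONDITION & SPEC =====
-- Pre_solve excludes: empty grids (moveTime = [] or first row [] — A raises IndexError),
-- and ragged grids with a row shorter than the first row, on which A sometimes raises and
-- sometimes returns (when the missing cells are never probed before the goal is assigned)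
-- while B's full-matrix relaxation always reads every cell and raises IndexError there.
def Pre_solve (moveTime : List (List Int)) : Prop :=
  moveTime ≠ [] ∧ 1 ≤ (moveTime.headD []).length ∧
    ∀ r ∈ moveTime, (moveTime.headD []).length ≤ r.length

instance (moveTime : List (List Int)) : Decidable (Pre_solve moveTime) := by
  unfold Pre_solve; infer_instance

def pvWitness_solve : List (List Int) := [[0, 4], [4, 4]]

def Spec_solve (moveTime : List (List Int)) (out : Int) : Prop := out = solve_alt moveTime
instance (moveTime : List (List Int)) (out : Int) : Decidable (Spec_solve moveTime out) := by
  unfold Spec_solve; infer_instance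

-- ===== CLAIM (what is proved, stated in full; the proofs are below) =====
def Claim_equal_solve : Prop := ∀ (moveTime : List (List Int)), Dom_solve moveTime →
  Pre_solve moveTime → Spec_solve moveTime (solve moveTime)

-- ===== LEMMAS AND PROOFS =====

-- ---------- walk theory ----------
def Wt (mo : List (List Int)) (c : Nat × Nat) : Int := (mo.getD c.1 []).getD c.2 0

def InB (n m : Nat) (c : Nat × Nat) : Prop := c.1 < n ∧ c.2 < m

def AdjC (n m : Nat) (u v : Nat × Nat) : Prop :=
  InB n m u ∧ InB n m v ∧
    ((u.1 = v.1 ∧ (u.2 + 1 = v.2 ∨ v.2 + 1 = u.2)) ∨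
     (u.2 = v.2 ∧ (u.1 + 1 = v.1 ∨ v.1 + 1 = u.1)))

def stepC (mo : List (List Int)) (t : Int) (c : Nat × Nat) : Int := max t (Wt mo c) + 1

def costFrom (mo : List (List Int)) (t : Int) (l : List (Nat × Nat)) : Int :=
  l.foldl (stepC mo) t

def ValidW (n m : Nat) (q : List (Nat × Nat)) : Prop :=
  q.head? = some (0, 0) ∧ List.IsChain (AdjC n m) q

def costW (mo : List (List Int)) (q : List (Nat × Nat)) : Int := costFrom mo 0 q.tail

def EndsAt (q : List (Nat × Nat)) (v : Nat × Nat) : Prop := q.getLast? = some v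

def MinD (mo : List (List Int)) (n m : Nat) (v : Nat × Nat) (t : Int) : Prop :=
  (∃ q, ValidW n m q ∧ EndsAt q v ∧ costW mo q = t) ∧
  (∀ q, ValidW n m q → EndsAt q v → t ≤ costW mo q)

lemma MinD_unique {mo n m v t t'} (h : MinD mo n m v t) (h' : MinD mo n m v t') : t = t' := by
  obtain ⟨⟨q, hq, he, hc⟩, hlb⟩ := h
  obtain ⟨⟨q', hq', he', hc'⟩, hlb'⟩ := h'
  have h1 := hlb' q hq he
  have h2 := hlb q' hq' he'
  omega

lemma le_costFrom (mo : List (List Int)) (l : List (Nat × Nat)) (t : Int) :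
    t ≤ costFrom mo t l := by
  induction l generalizing t with
  | nil => simp [costFrom]
  | cons c l ih =>
    have h1 : t ≤ stepC mo t c := by simp [stepC]; omega
    exact le_trans h1 (ih _)

lemma costFrom_mono (mo : List (List Int)) (l : List (Nat × Nat)) {t t' : Int} (h : t ≤ t') :
    costFrom mo t l ≤ costFrom mo t' l := by
  induction l generalizing t t' with
  | nil => simpa [costFrom]
  | cons c l ih =>
    have : stepC mo t c ≤ stepC mo t' c := by simp [stepC]; omega
    exact ih this

lemma costFrom_append (mo : List (List Int)) (t : Int) (l1 l2 : List (Nat × Nat)) :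
    costFrom mo t (l1 ++ l2) = costFrom mo (costFrom mo t l1) l2 :=
  List.foldl_append

lemma costW_nonneg (mo : List (List Int)) (q : List (Nat × Nat)) : 0 ≤ costW mo q :=
  le_costFrom mo _ 0

lemma costW_snoc (mo : List (List Int)) {q : List (Nat × Nat)} (h : q ≠ []) (v : Nat × Nat) :
    costW mo (q ++ [v]) = stepC mo (costW mo q) v := by
  obtain ⟨a, q', rfl⟩ := List.exists_cons_of_ne_nil h
  simp [costW, costFrom_append, costFrom]

lemma valid_ne_nil {n m q} (h : ValidW n m q) : q ≠ [] := by
  intro rfl; simp [ValidW] at h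

lemma valid_snoc {n m : Nat} {q : List (Nat × Nat)} {u v : Nat × Nat}
    (hq : ValidW n m q) (he : EndsAt q u) (ha : AdjC n m u v) :
    ValidW n m (q ++ [v]) ∧ EndsAt (q ++ [v]) v := by
  obtain ⟨hh, hc⟩ := hq
  refine ⟨⟨?_, ?_⟩, ?_⟩
  · rw [List.head?_append_of_ne_nil _ (valid_ne_nil ⟨hh, hc⟩)]; exact hh
  · rw [List.isChain_append]
    refine ⟨hc, by simp, ?_⟩
    intro x hx y hy
    simp at hy
    subst hy
    rw [EndsAt] at he
    rw [he] at hx; simp at hx; subst hx; exact ha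
  · simp [EndsAt]

lemma valid_decomp {mo : List (List Int)} {n m : Nat} {q : List (Nat × Nat)} {v : Nat × Nat}
    (hq : ValidW n m q) (he : EndsAt q v) :
    (q = [(0, 0)] ∧ v = (0, 0)) ∨
    ∃ q' u, q = q' ++ [v] ∧ ValidW n m q' ∧ EndsAt q' u ∧ AdjC n m u v ∧
      costW mo q = stepC mo (costW mo q') v := by
  have hne := valid_ne_nil hq
  have hsplit : q.dropLast ++ [v] = q := by
    apply List.dropLast_append_getLast?; exact he
  by_cases hd : q.dropLast = []
  · left
    rw [hd] at hsplit
    simp at hsplit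
    obtain ⟨hh, _⟩ := hq
    rw [← hsplit] at hh; simp at hh
    subst hh
    exact ⟨hsplit.symm, rfl⟩
  · right
    obtain ⟨hh, hc⟩ := hq
    rw [← hsplit] at hc
    rw [List.isChain_append] at hc
    obtain ⟨hc1, _, hseam⟩ := hc
    have hu : ∃ u, q.dropLast.getLast? = some u := by
      cases hgl : q.dropLast.getLast? with
      | none => exact absurd (List.getLast?_eq_none_iff.mp hgl) hd
      | some u => exact ⟨u, rfl⟩
    obtain ⟨u, hu⟩ := hu
    refine ⟨q.dropLast, u, hsplit.symm, ⟨?_, hc1⟩, hu, ?_, ?_⟩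
    · rw [← hsplit] at hh
      rwa [List.head?_append_of_ne_nil _ hd] at hh
    · exact hseam u hu v (by simp)
    · have h2 := costW_snoc mo hd v
      rw [hsplit] at h2; exact h2

lemma chain_inB_aux {n m : Nat} :
    ∀ (q : List (Nat × Nat)) (a : Nat × Nat), InB n m a → List.IsChain (AdjC n m) (a :: q) →
      ∀ c ∈ a :: q, InB n m c := by
  intro q
  induction q with
  | nil => intro a ha _ c hc; simp at hc; subst hc; exact ha
  | cons b q'' ih =>
    intro a ha hc c hcm
    rw [List.isChain_cons_cons] at hc
    rcases List.mem_cons.mp hcm with rfl | hcm'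
    · exact ha
    · exact ih b hc.1.2.1 hc.2 c hcm'

lemma valid_mem_inB {n m : Nat} (hn : 0 < n) (hm : 0 < m) {q : List (Nat × Nat)}
    (hq : ValidW n m q) : ∀ c ∈ q, InB n m c := by
  obtain ⟨hh, hc⟩ := hq
  obtain ⟨a, q', rfl⟩ := List.exists_cons_of_ne_nil (valid_ne_nil ⟨hh, hc⟩)
  simp at hh; subst hh
  exact chain_inB_aux q' (0, 0) ⟨hn, hm⟩ hc

-- straight-line walk to any cell: connectivity of the grid
lemma conn_walk {n m : Nat} (hn : 0 < n) (hm : 0 < m) :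
    ∀ i j, i < n → j < m → ∃ q, ValidW n m q ∧ EndsAt q (i, j) ∧ q.length = i + j + 1 := by
  have base : ∃ q, ValidW n m q ∧ EndsAt q (0, 0) ∧ q.length = 1 :=
    ⟨[(0, 0)], ⟨rfl, by simp⟩, rfl, rfl⟩
  have row : ∀ j, j < m → ∃ q, ValidW n m q ∧ EndsAt q (0, j) ∧ q.length = j + 1 := by
    intro j
    induction j with
    | zero => intro _; exact base
    | succ j ih =>
      intro hj
      obtain ⟨q, hq, he, hl⟩ := ih (by omega)
      have ha : AdjC n m (0, j) (0, j + 1) := ⟨⟨hn, by omega⟩, ⟨hn, hj⟩, Or.inl ⟨rfl, Or.inl rfl⟩⟩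
      obtain ⟨hq', he'⟩ := valid_snoc hq he ha
      exact ⟨q ++ [(0, j + 1)], hq', he', by simp [hl]⟩
  intro i
  induction i with
  | zero => exact fun j _ hj => by simpa using row j hj
  | succ i ih =>
    intro j hi hj
    obtain ⟨q, hq, he, hl⟩ := ih j (by omega) hj
    have ha : AdjC n m (i, j) (i + 1, j) := ⟨⟨by omega, hj⟩, ⟨hi, hj⟩, Or.inr ⟨rfl, Or.inl rfl⟩⟩
    obtain ⟨hq', he'⟩ := valid_snoc hq he ha
    exact ⟨q ++ [(i + 1, j)], hq', he', by simp [hl]; omega⟩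

-- ---------- cycle cutting: a cost-minimal walk needs at most n*m vertices ----------
lemma dup_split {q : List (Nat × Nat)} (h : ¬ q.Nodup) :
    ∃ a l1 l2 l3, q = l1 ++ a :: (l2 ++ a :: l3) := by
  obtain ⟨a, hdup⟩ := List.exists_duplicate_iff_not_nodup.mpr h
  have hsub := List.duplicate_iff_sublist.mp hdup
  obtain ⟨r1, r2, rfl, ha1, ha2⟩ := List.cons_sublist_iff.mp hsub
  obtain ⟨l1, t1, rfl⟩ := List.mem_iff_append.mp ha1
  have ha2' : a ∈ r2 := ha2.subset (by simp)
  obtain ⟨s2, l3, rfl⟩ := List.mem_iff_append.mp ha2'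
  exact ⟨a, l1, t1 ++ s2, l3, by simp⟩

lemma cut_walk {mo : List (List Int)} {n m : Nat} (hn : 0 < n) (hm : 0 < m) :
    ∀ (q : List (Nat × Nat)) (v : Nat × Nat), ValidW n m q → EndsAt q v →
      ∃ q', ValidW n m q' ∧ EndsAt q' v ∧ q'.length ≤ n * m ∧ costW mo q' ≤ costW mo q := by
  intro q
  induction hl : q.length using Nat.strong_induction_on generalizing q with
  | _ k ih =>
  intro v hq he
  by_cases hlen : q.length ≤ n * m
  · exact ⟨q, hq, he, hlen, le_refl _⟩
  · -- q has more than n*m vertices, all in the grid: a duplicate exists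
    have hnd : ¬ q.Nodup := by
      intro hnd
      have hmem : ∀ c ∈ q, c ∈ (Finset.range n) ×ˢ (Finset.range m) := by
        intro c hc
        have := valid_mem_inB hn hm hq c hc
        simp [Finset.mem_product, InB] at this ⊢; exact this
      have h1 := List.toFinset_card_of_nodup hnd
      have h2 : q.toFinset ⊆ (Finset.range n) ×ˢ (Finset.range m) :=
        fun x hx => hmem x (List.mem_toFinset.mp hx)
      have h3 := Finset.card_le_card h2
      simp [Finset.card_product] at h3
      omega
    obtain ⟨a, l1, l2, l3, rfl⟩ := dup_split hnd
    obtain ⟨hh, hc⟩ := hq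
    -- the cut walk
    set q2 := l1 ++ a :: l3 with hq2
    have hlen_eq : (l1 ++ a :: (l2 ++ a :: l3)).length = l1.length + l2.length + l3.length + 2 := by
      simp; omega
    have hq2len : q2.length = l1.length + l3.length + 1 := by simp [hq2]; omega
    -- chain of the cut walk
    have hc2 : List.IsChain (AdjC n m) q2 := by
      rw [List.isChain_append] at hc
      obtain ⟨hcl1, hcin, hseam⟩ := hc
      have : (a :: (l2 ++ a :: l3)) = (a :: l2) ++ (a :: l3) := by simp
      rw [this, List.isChain_append] at hcin
      obtain ⟨_, hcal3, _⟩ := hcin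
      rw [hq2, List.isChain_append]
      exact ⟨hcl1, hcal3, fun x hx y hy => by
        simp at hy; subst hy; exact hseam x hx a (by simp)⟩
    have hh2 : q2.head? = some (0, 0) := by
      cases l1 with
      | nil =>
        rw [List.nil_append] at hq2
        rw [hq2]
        rw [List.nil_append] at hh
        simpa using hh
      | cons x l1' =>
        rw [List.head?_append_of_ne_nil _ (by simp)] at hh
        rw [hq2, List.head?_append_of_ne_nil _ (by simp)]
        exact hh
    have he2 : EndsAt q2 v := by
      rw [EndsAt] at he ⊢
      have e1 : l1 ++ a :: (l2 ++ a :: l3) = (l1 ++ a :: l2) ++ (a :: l3) := by simp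
      rw [e1, List.getLast?_append_cons] at he
      rw [hq2, List.getLast?_append_cons]
      exact he
    -- cost does not increase
    have hcost : costW mo q2 ≤ costW mo (l1 ++ a :: (l2 ++ a :: l3)) := by
      cases l1 with
      | nil =>
        simp only [hq2, List.nil_append, costW, List.tail_cons]
        have e1 : l2 ++ a :: l3 = (l2 ++ [a]) ++ l3 := by simp
        rw [e1, costFrom_append]
        exact costFrom_mono mo l3 (le_costFrom mo _ 0)
      | cons x l1' =>
        simp only [hq2, List.cons_append, costW, List.tail_cons]
        have e1 : l1' ++ a :: (l2 ++ a :: l3) = (l1' ++ [a]) ++ ((l2 ++ [a]) ++ l3) := by simp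
        have e2 : l1' ++ a :: l3 = (l1' ++ [a]) ++ l3 := by simp
        have hL : costFrom mo 0 (l1' ++ a :: l3) =
            costFrom mo (costFrom mo 0 (l1' ++ [a])) l3 := by rw [e2, costFrom_append]
        have hR : costFrom mo 0 (l1' ++ a :: (l2 ++ a :: l3)) =
            costFrom mo (costFrom mo (costFrom mo 0 (l1' ++ [a])) (l2 ++ [a])) l3 := by
          rw [e1, costFrom_append, costFrom_append]
        rw [hL, hR]
        exact costFrom_mono mo l3 (le_costFrom mo _ _)
    obtain ⟨q3, hq3, he3, hl3', hc3⟩ := ih q2.length (by omega) q2 rfl v ⟨hh2, hc2⟩ he2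
    exact ⟨q3, hq3, he3, hl3', le_trans hc3 hcost⟩

-- ---------- B side: Jacobi iteration ----------
def itB (mo : List (List Int)) (n m : Nat) : Nat → List (List (Option Int)) → List (List (Option Int))
  | 0, d => d
  | k + 1, d => pvStepB mo n m (itB mo n m k d)

lemma itB_comm (mo : List (List Int)) (n m k : Nat) (d : List (List (Option Int))) :
    itB mo n m k (pvStepB mo n m d) = pvStepB mo n m (itB mo n m k d) := by
  induction k with
  | zero => rfl
  | succ k ih => simp [itB, ih]

lemma itB_fix {mo : List (List Int)} {n m : Nat} {d : List (List (Option Int))}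
    (h : pvStepB mo n m d = d) (k : Nat) : itB mo n m k d = d := by
  induction k with
  | zero => rfl
  | succ k ih => simp [itB, ih, h]

lemma loopB_eq_itB (mo : List (List Int)) (n m : Nat) :
    ∀ (k : Nat) (d : List (List (Option Int))), pvLoopB mo n m k d = itB mo n m k d := by
  intro k
  induction k with
  | zero => intro d; rfl
  | succ k ih =>
    intro d
    show (let nd := pvStepB mo n m d; if nd = d then d else pvLoopB mo n m k nd) = _
    by_cases h : pvStepB mo n m d = d
    · have hfix : itB mo n m (k + 1) d = d := by
        show pvStepB mo n m (itB mo n m k d) = d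
        rw [itB_fix h, h]
      rw [hfix]
      simp [h]
    · simp only [if_neg h]
      rw [ih, itB_comm]
      rfl

lemma entry_stepB {mo : List (List Int)} {n m : Nat} {d : List (List (Option Int))}
    {i j : Nat} (hi : i < n) (hj : j < m) :
    pvEntry (pvStepB mo n m d) i j =
      if i = 0 ∧ j = 0 then some 0 else pvBest mo n m d i j := by
  simp [pvEntry, pvStepB, List.getD_eq_getElem?_getD, List.getElem?_map, List.getElem?_range, hi, hj]

-- the initial matrix of B
def d0B (n m : Nat) : List (List (Option Int)) :=
  (List.replicate n (List.replicate m (none : Option Int))).set 0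
      ((List.replicate m (none : Option Int)).set 0 (some 0))

lemma getD_replicate_none (m j : Nat) :
    (List.replicate m (none : Option Int)).getD j none = none := by
  simp [List.getD_eq_getElem?_getD, List.getElem?_replicate]
  split_ifs <;> rfl

lemma entry_d0B {n m : Nat} (hn : 0 < n) (hm : 0 < m) (i j : Nat) :
    pvEntry (d0B n m) i j = if i = 0 ∧ j = 0 then some 0 else none := by
  unfold pvEntry d0B
  rcases Nat.eq_zero_or_pos i with rfl | hi
  · have hrow : ((List.replicate n (List.replicate m (none : Option Int))).set 0
        ((List.replicate m (none : Option Int)).set 0 (some 0))).getD 0 [] =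
        (List.replicate m (none : Option Int)).set 0 (some 0) := by
      rw [List.getD_eq_getElem?_getD, List.getElem?_set_self (by simpa using hn)]
      rfl
    rw [hrow]
    rcases Nat.eq_zero_or_pos j with rfl | hj
    · rw [List.getD_eq_getElem?_getD, List.getElem?_set_self (by simpa using hm)]
      simp
    · have hne : (0 : Nat) ≠ j := by omega
      rw [List.getD_eq_getElem?_getD, List.getElem?_set_ne hne, ← List.getD_eq_getElem?_getD,
        getD_replicate_none]
      simp
      omega
  · have hne : (0 : Nat) ≠ i := by omega
    have hrow : ((List.replicate n (List.replicate m (none : Option Int))).set 0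
        ((List.replicate m (none : Option Int)).set 0 (some 0))).getD i [] =
        (if i < n then List.replicate m (none : Option Int) else []) := by
      rw [List.getD_eq_getElem?_getD, List.getElem?_set_ne hne, List.getElem?_replicate]
      split_ifs <;> rfl
    rw [hrow, if_neg (by omega : ¬ (i = 0 ∧ j = 0))]
    split_ifs with h
    · exact getD_replicate_none m j
    · simp

-- option order with none = +infinity
def ole : Option Int → Option Int → Prop
  | _, none => True
  | none, some _ => False
  | some s, some t => s ≤ t

lemma ole_refl (a : Option Int) : ole a a := by cases a <;> simp [ole]

lemma ole_trans {a b c : Option Int} (h1 : ole a b) (h2 : ole b c) : ole a c := by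
  cases a <;> cases b <;> cases c <;> simp_all [ole] <;> omega

lemma ole_some_iff {a : Option Int} {t : Int} :
    ole a (some t) ↔ ∃ s, a = some s ∧ s ≤ t := by
  cases a <;> simp [ole]

def dle (d' d : List (List (Option Int))) : Prop :=
  ∀ i j, ole (pvEntry d' i j) (pvEntry d i j)

lemma ole_some_some {s t : Int} : ole (some s) (some t) ↔ s ≤ t := Iff.rfl

lemma ole_none_right (a : Option Int) : ole a none := by cases a <;> trivial

-- equation lemmas for pvCand
lemma pvCand_oob {mo : List (List Int)} {n m : Nat} {d : List (List (Option Int))}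
    {i j : Nat} {p : Int × Int} (h : ¬ (0 ≤ p.1 ∧ p.1 < (n : Int) ∧ 0 ≤ p.2 ∧ p.2 < (m : Int)))
    (best : Option Int) : pvCand mo n m d i j best p = best := by
  unfold pvCand; rw [if_neg h]

lemma pvCand_entry_none {mo : List (List Int)} {n m : Nat} {d : List (List (Option Int))}
    {i j : Nat} {p : Int × Int} (h : 0 ≤ p.1 ∧ p.1 < (n : Int) ∧ 0 ≤ p.2 ∧ p.2 < (m : Int))
    (hent : pvEntry d p.1.toNat p.2.toNat = none) (best : Option Int) :
    pvCand mo n m d i j best p = best := by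
  unfold pvCand; rw [if_pos h, hent]

lemma pvCand_some_none {mo : List (List Int)} {n m : Nat} {d : List (List (Option Int))}
    {i j : Nat} {p : Int × Int} {dv : Int}
    (h : 0 ≤ p.1 ∧ p.1 < (n : Int) ∧ 0 ≤ p.2 ∧ p.2 < (m : Int))
    (hent : pvEntry d p.1.toNat p.2.toNat = some dv) :
    pvCand mo n m d i j none p = some (max dv ((mo.getD i []).getD j 0) + 1) := by
  unfold pvCand; rw [if_pos h, hent]

lemma pvCand_some_some {mo : List (List Int)} {n m : Nat} {d : List (List (Option Int))}
    {i j : Nat} {p : Int × Int} {dv b : Int}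
    (h : 0 ≤ p.1 ∧ p.1 < (n : Int) ∧ 0 ≤ p.2 ∧ p.2 < (m : Int))
    (hent : pvEntry d p.1.toNat p.2.toNat = some dv) :
    pvCand mo n m d i j (some b) p =
      if max dv ((mo.getD i []).getD j 0) + 1 < b
      then some (max dv ((mo.getD i []).getD j 0) + 1) else some b := by
  unfold pvCand; rw [if_pos h, hent]

lemma cand_ole (mo : List (List Int)) (n m : Nat) (d : List (List (Option Int)))
    (i j : Nat) (best : Option Int) (p : Int × Int) :
    ole (pvCand mo n m d i j best p) best := by
  by_cases h : 0 ≤ p.1 ∧ p.1 < (n : Int) ∧ 0 ≤ p.2 ∧ p.2 < (m : Int)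
  · cases hent : pvEntry d p.1.toNat p.2.toNat with
    | none => rw [pvCand_entry_none h hent]; exact ole_refl best
    | some dv =>
      cases best with
      | none => rw [pvCand_some_none h hent]; exact ole_none_right _
      | some b =>
        rw [pvCand_some_some h hent]
        split_ifs with h2
        · exact le_of_lt h2
        · exact le_refl b
  · rw [pvCand_oob h]; exact ole_refl best

lemma foldCand_ole_acc (mo : List (List Int)) (n m : Nat) (d : List (List (Option Int)))
    (i j : Nat) :
    ∀ (cands : List (Int × Int)) (best : Option Int),
      ole (cands.foldl (pvCand mo n m d i j) best) best := by
  intro cands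
  induction cands with
  | nil => intro best; exact ole_refl best
  | cons p cands ih =>
    intro best
    exact ole_trans (ih (pvCand mo n m d i j best p)) (cand_ole mo n m d i j best p)

lemma cand_le_val {mo : List (List Int)} {n m : Nat} {d : List (List (Option Int))}
    {i j : Nat} {p : Int × Int} {dv : Int}
    (h : 0 ≤ p.1 ∧ p.1 < (n : Int) ∧ 0 ≤ p.2 ∧ p.2 < (m : Int))
    (hent : pvEntry d p.1.toNat p.2.toNat = some dv) (best : Option Int) :
    ole (pvCand mo n m d i j best p) (some (max dv ((mo.getD i []).getD j 0) + 1)) := by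
  cases best with
  | none => rw [pvCand_some_none h hent]; exact le_refl _
  | some b =>
    rw [pvCand_some_some h hent]
    split_ifs with h2
    · exact le_refl _
    · exact le_of_not_gt h2

lemma foldCand_le_cand {mo : List (List Int)} {n m : Nat} {d : List (List (Option Int))}
    {i j : Nat} {p : Int × Int} {dv : Int}
    (hb : 0 ≤ p.1 ∧ p.1 < (n : Int) ∧ 0 ≤ p.2 ∧ p.2 < (m : Int))
    (hent : pvEntry d p.1.toNat p.2.toNat = some dv) :
    ∀ (cands : List (Int × Int)), p ∈ cands → ∀ best,
      ole (cands.foldl (pvCand mo n m d i j) best)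
        (some (max dv ((mo.getD i []).getD j 0) + 1)) := by
  intro cands hp best
  obtain ⟨pre, post, rfl⟩ := List.mem_iff_append.mp hp
  rw [List.foldl_append]
  simp only [List.foldl_cons]
  exact ole_trans (foldCand_ole_acc mo n m d i j post _) (cand_le_val hb hent _)

-- mapping between the Int coordinate pairs of pvNbrs and adjacency of cells
lemma nbrs_to_adj {n m : Nat} {i j : Nat} (hi : i < n) (hj : j < m) {p : Int × Int}
    (hp : p ∈ pvNbrs i j) (hb : 0 ≤ p.1 ∧ p.1 < (n : Int) ∧ 0 ≤ p.2 ∧ p.2 < (m : Int)) :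
    AdjC n m (p.1.toNat, p.2.toNat) (i, j) := by
  obtain ⟨h1, h2, h3, h4⟩ := hb
  simp [pvNbrs] at hp
  rcases hp with rfl | rfl | rfl | rfl <;> dsimp only at h1 h2 h3 h4 ⊢
  · exact ⟨⟨by omega, by omega⟩, ⟨hi, hj⟩, Or.inr ⟨by omega, Or.inl (by omega)⟩⟩
  · exact ⟨⟨by omega, by omega⟩, ⟨hi, hj⟩, Or.inr ⟨by omega, Or.inr (by omega)⟩⟩
  · exact ⟨⟨by omega, by omega⟩, ⟨hi, hj⟩, Or.inl ⟨by omega, Or.inl (by omega)⟩⟩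
  · exact ⟨⟨by omega, by omega⟩, ⟨hi, hj⟩, Or.inl ⟨by omega, Or.inr (by omega)⟩⟩

lemma adj_to_nbrs {n m : Nat} {u v : Nat × Nat} (ha : AdjC n m u v) :
    ∃ p ∈ pvNbrs v.1 v.2, (0 ≤ p.1 ∧ p.1 < (n : Int) ∧ 0 ≤ p.2 ∧ p.2 < (m : Int)) ∧
      p.1.toNat = u.1 ∧ p.2.toNat = u.2 := by
  obtain ⟨⟨hu1, hu2⟩, ⟨hv1, hv2⟩, hsh⟩ := ha
  rcases hsh with ⟨he, hor⟩ | ⟨he, hor⟩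
  · rcases hor with h | h
    · refine ⟨((v.1 : Int), (v.2 : Int) - 1), by simp [pvNbrs], ⟨by omega, by omega, by omega, by omega⟩, by omega, by omega⟩
    · refine ⟨((v.1 : Int), (v.2 : Int) + 1), by simp [pvNbrs], ⟨by omega, by omega, by omega, by omega⟩, by omega, by omega⟩
  · rcases hor with h | h
    · refine ⟨((v.1 : Int) - 1, (v.2 : Int)), by simp [pvNbrs], ⟨by omega, by omega, by omega, by omega⟩, by omega, by omega⟩
    · refine ⟨((v.1 : Int) + 1, (v.2 : Int)), by simp [pvNbrs], ⟨by omega, by omega, by omega, by omega⟩, by omega, by omega⟩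

-- soundness: every finite entry of the iteration is the cost of some walk
def SoundM (mo : List (List Int)) (n m : Nat) (d : List (List (Option Int))) : Prop :=
  ∀ c : Nat × Nat, InB n m c → ∀ t, pvEntry d c.1 c.2 = some t →
    ∃ q, ValidW n m q ∧ EndsAt q c ∧ costW mo q = t

lemma foldCand_sound {mo : List (List Int)} {n m : Nat} {d : List (List (Option Int))}
    {i j : Nat} {t : Int} :
    ∀ (cands : List (Int × Int)) (best : Option Int),
      cands.foldl (pvCand mo n m d i j) best = some t →
      best = some t ∨ ∃ p ∈ cands, (0 ≤ p.1 ∧ p.1 < (n : Int) ∧ 0 ≤ p.2 ∧ p.2 < (m : Int)) ∧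
        ∃ dv, pvEntry d p.1.toNat p.2.toNat = some dv ∧
          t = max dv ((mo.getD i []).getD j 0) + 1 := by
  intro cands
  induction cands with
  | nil => intro best h; exact Or.inl h
  | cons p cands ih =>
    intro best h
    rw [List.foldl_cons] at h
    rcases ih _ h with hc | ⟨p', hp', hbp', dv, hent', ht'⟩
    · by_cases hb : 0 ≤ p.1 ∧ p.1 < (n : Int) ∧ 0 ≤ p.2 ∧ p.2 < (m : Int)
      · cases hent : pvEntry d p.1.toNat p.2.toNat with
        | none => rw [pvCand_entry_none hb hent] at hc; exact Or.inl hc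
        | some dv =>
          cases best with
          | none =>
            rw [pvCand_some_none hb hent] at hc
            refine Or.inr ⟨p, by simp, hb, dv, hent, ?_⟩
            simpa using hc.symm
          | some b =>
            rw [pvCand_some_some hb hent] at hc
            split_ifs at hc with h2
            · refine Or.inr ⟨p, by simp, hb, dv, hent, by simpa using hc.symm⟩
            · exact Or.inl hc
      · rw [pvCand_oob hb] at hc; exact Or.inl hc
    · exact Or.inr ⟨p', by simp [hp'], hbp', dv, hent', ht'⟩

lemma sound_d0 {mo : List (List Int)} {n m : Nat} (hn : 0 < n) (hm : 0 < m) :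
    SoundM mo n m (d0B n m) := by
  intro c hc t hent
  rw [entry_d0B hn hm] at hent
  by_cases h0 : c.1 = 0 ∧ c.2 = 0
  · rw [if_pos h0] at hent
    have hc0 : c = (0, 0) := Prod.ext h0.1 h0.2
    simp at hent
    subst hent
    exact ⟨[(0, 0)], ⟨rfl, by simp⟩, by simp [EndsAt, hc0], by simp [costW, costFrom]⟩
  · rw [if_neg h0] at hent
    exact absurd hent (by simp)

lemma sound_step {mo : List (List Int)} {n m : Nat} {d : List (List (Option Int))}
    (h : SoundM mo n m d) : SoundM mo n m (pvStepB mo n m d) := by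
  intro c hc t hent
  obtain ⟨c1, c2⟩ := c
  rw [entry_stepB hc.1 hc.2] at hent
  split_ifs at hent with h0
  · obtain ⟨rfl, rfl⟩ := h0
    simp at hent
    subst hent
    exact ⟨[(0, 0)], ⟨rfl, by simp⟩, by simp [EndsAt], by simp [costW, costFrom]⟩
  · rcases foldCand_sound (pvNbrs c1 c2) none hent with hc' | ⟨p, hp, hbp, dv, hent', ht'⟩
    · exact absurd hc' (by simp)
    · have hadj := nbrs_to_adj hc.1 hc.2 hp hbp
      obtain ⟨q, hq, he, hcost⟩ := h (p.1.toNat, p.2.toNat) hadj.1 dv hent'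
      obtain ⟨hq', he'⟩ := valid_snoc hq he hadj
      refine ⟨q ++ [(c1, c2)], hq', he', ?_⟩
      rw [costW_snoc mo (valid_ne_nil hq) _, hcost, ht']
      rfl

lemma sound_itB {mo : List (List Int)} {n m : Nat} (hn : 0 < n) (hm : 0 < m) (k : Nat) :
    SoundM mo n m (itB mo n m k (d0B n m)) := by
  induction k with
  | zero => exact sound_d0 hn hm
  | succ k ih => exact sound_step ih

-- source entry is always 0
lemma entry_itB_src {mo : List (List Int)} {n m : Nat} (hn : 0 < n) (hm : 0 < m) (k : Nat) :
    pvEntry (itB mo n m k (d0B n m)) 0 0 = some 0 := by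
  cases k with
  | zero =>
    rw [show itB mo n m 0 (d0B n m) = d0B n m from rfl, entry_d0B hn hm]; simp
  | succ k => rw [show itB mo n m (k+1) (d0B n m) = pvStepB mo n m (itB mo n m k (d0B n m)) from rfl,
      entry_stepB hn hm]; simp

-- completeness: after k rounds every walk of at most k+1 vertices is accounted for
lemma comp_itB {mo : List (List Int)} {n m : Nat} (hn : 0 < n) (hm : 0 < m) :
    ∀ (k : Nat) (q : List (Nat × Nat)) (v : Nat × Nat), ValidW n m q → EndsAt q v →
      q.length ≤ k + 1 →
      ole (pvEntry (itB mo n m k (d0B n m)) v.1 v.2) (some (costW mo q)) := by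
  intro k
  induction k with
  | zero =>
    intro q v hq he hl
    obtain ⟨a, q', rfl⟩ := List.exists_cons_of_ne_nil (valid_ne_nil hq)
    have hq0 : q' = [] := by
      cases q' with
      | nil => rfl
      | cons b t => simp at hl
    subst hq0
    obtain ⟨hh, _⟩ := hq
    simp at hh; subst hh
    rw [EndsAt] at he; simp at he; subst he
    rw [show itB mo n m 0 (d0B n m) = d0B n m from rfl, entry_d0B hn hm]
    simp only [costW, List.tail_cons]
    have h0 : costFrom mo 0 ([] : List (Nat × Nat)) = 0 := rfl
    rw [h0]
    simp
    exact le_refl _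
  | succ k ih =>
    intro q v hq he hl
    rcases valid_decomp (mo := mo) hq he with ⟨rfl, rfl⟩ | ⟨q', u, rfl, hq', he', hadj, hcost⟩
    · rw [entry_itB_src hn hm]
      exact costW_nonneg mo _
    · have hvin : InB n m v := hadj.2.1
      have hl' : q'.length ≤ k + 1 := by simp at hl; omega
      have hIH := ih q' u hq' he' hl'
      obtain ⟨du, hentu, hdu⟩ := ole_some_iff.mp hIH
      rw [show itB mo n m (k+1) (d0B n m) = pvStepB mo n m (itB mo n m k (d0B n m)) from rfl,
        entry_stepB hvin.1 hvin.2]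
      split_ifs with h0
      · exact costW_nonneg mo _
      · obtain ⟨p, hp, hbp, hp1, hp2⟩ := adj_to_nbrs hadj
        rw [← hp1, ← hp2] at hentu
        have h1 := foldCand_le_cand (mo := mo) (i := v.1) (j := v.2) hbp hentu (pvNbrs v.1 v.2) hp none
        refine ole_trans h1 ?_
        rw [ole_some_some, hcost]
        show max du ((mo.getD v.1 []).getD v.2 0) + 1 ≤ stepC mo (costW mo q') v
        simp only [stepC, Wt]
        omega

lemma nm_ge {n m : Nat} (hn : 0 < n) (hm : 0 < m) : n + m - 1 ≤ n * m := by
  obtain ⟨a, rfl⟩ : ∃ a, n = a + 1 := ⟨n - 1, by omega⟩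
  obtain ⟨b, rfl⟩ : ∃ b, m = b + 1 := ⟨m - 1, by omega⟩
  have : (a + 1) * (b + 1) = a * b + a + b + 1 := by ring
  omega

lemma solve_alt_eq (mo : List (List Int)) :
    solve_alt mo =
      ((((itB mo mo.length (mo.headD []).length (mo.length * (mo.headD []).length)
          (d0B mo.length (mo.headD []).length)).getD (mo.length - 1) []).getD
          ((mo.headD []).length - 1) none).getD 0) := by
  simp only [solve_alt]
  rw [show ((List.replicate mo.length (List.replicate (mo.headD []).length (none : Option Int))).set 0
      ((List.replicate (mo.headD []).length (none : Option Int)).set 0 (some 0))) =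
      d0B mo.length (mo.headD []).length from rfl]
  rw [loopB_eq_itB]

lemma solve_alt_minD {mo : List (List Int)} (hpre : Pre_solve mo) :
    MinD mo mo.length (mo.headD []).length
      (mo.length - 1, (mo.headD []).length - 1) (solve_alt mo) := by
  obtain ⟨hne, hm1, _⟩ := hpre
  have hn : 0 < mo.length := List.length_pos_iff.mpr hne
  have hm : 0 < (mo.headD []).length := hm1
  obtain ⟨qc, hqc, hec, hlc⟩ := conn_walk hn hm (mo.length - 1) ((mo.headD []).length - 1)
    (by omega) (by omega)
  have hnm := nm_ge hn hm
  have hlen : qc.length ≤ mo.length * (mo.headD []).length + 1 := by omega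
  have h1 := comp_itB (mo := mo) hn hm (mo.length * (mo.headD []).length) qc _ hqc hec hlen
  obtain ⟨tB, htB, _⟩ := ole_some_iff.mp h1
  dsimp only at htB
  have hval : solve_alt mo = tB := by
    rw [solve_alt_eq]
    have : pvEntry (itB mo mo.length (mo.headD []).length
        (mo.length * (mo.headD []).length) (d0B mo.length (mo.headD []).length))
        (mo.length - 1) ((mo.headD []).length - 1) = some tB := htB
    rw [show (((itB mo mo.length (mo.headD []).length (mo.length * (mo.headD []).length)
        (d0B mo.length (mo.headD []).length)).getD (mo.length - 1) []).getD
        ((mo.headD []).length - 1) none) = pvEntry (itB mo mo.length (mo.headD []).length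
        (mo.length * (mo.headD []).length) (d0B mo.length (mo.headD []).length))
        (mo.length - 1) ((mo.headD []).length - 1) from rfl, this]
    rfl
  refine ⟨?_, ?_⟩
  · obtain ⟨q, hq, he, hc⟩ := sound_itB hn hm (mo.length * (mo.headD []).length)
      (mo.length - 1, (mo.headD []).length - 1) ⟨by omega, by omega⟩ tB htB
    exact ⟨q, hq, he, by rw [hc, hval]⟩
  · intro q hq he
    obtain ⟨q2, hq2, he2, hl2, hc2⟩ := cut_walk (mo := mo) hn hm q _ hq he
    have h3 := comp_itB (mo := mo) hn hm (mo.length * (mo.headD []).length) q2 _ hq2 he2 (by omega)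
    dsimp only at h3
    rw [htB] at h3
    rw [ole_some_some] at h3
    rw [hval]
    omega

-- ---------- A side: heap-pop and time-matrix lemmas ----------
lemma lexLt_irrefl (a : Int × Int × Int) : pvLexLt a a = false := by
  simp [pvLexLt]

lemma lexLt_asymm {a b : Int × Int × Int} (h : pvLexLt a b = true) : pvLexLt b a = false := by
  simp [pvLexLt] at h ⊢
  omega

lemma lexLt_false_trans {a b c : Int × Int × Int} (h1 : pvLexLt b a = false)
    (h2 : pvLexLt c b = false) : pvLexLt c a = false := by
  simp [pvLexLt] at h1 h2 ⊢
  omega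

lemma lexLt_false_fst {z y : Int × Int × Int} (h : pvLexLt z y = false) : y.1 ≤ z.1 := by
  simp [pvLexLt] at h
  omega

lemma popMin_eq_none {h : List (Int × Int × Int)} (hp : pvPopMin h = none) : h = [] := by
  cases h with
  | nil => rfl
  | cons x xs =>
    unfold pvPopMin at hp
    cases hrec : pvPopMin xs with
    | none => rw [hrec] at hp; simp at hp
    | some p =>
      obtain ⟨y, ys⟩ := p
      rw [hrec] at hp
      by_cases hlt : pvLexLt y x <;> simp [hlt] at hp

lemma popMin_spec : ∀ (h : List (Int × Int × Int)) (y : Int × Int × Int)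
    (ys : List (Int × Int × Int)), pvPopMin h = some (y, ys) →
    h.Perm (y :: ys) ∧ ∀ z ∈ h, pvLexLt z y = false := by
  intro h
  induction h with
  | nil => intro y ys hp; simp [pvPopMin] at hp
  | cons x xs ih =>
    intro y ys hp
    unfold pvPopMin at hp
    cases hrec : pvPopMin xs with
    | none =>
      have hxs : xs = [] := popMin_eq_none hrec
      subst hxs
      rw [hrec] at hp
      simp at hp
      obtain ⟨rfl, rfl⟩ := hp
      refine ⟨List.Perm.refl _, fun z hz => ?_⟩
      simp at hz; subst hz; exact lexLt_irrefl _
    | some p =>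
      obtain ⟨y', ys'⟩ := p
      rw [hrec] at hp
      dsimp only at hp
      obtain ⟨hperm', hmin'⟩ := ih y' ys' hrec
      by_cases hlt : pvLexLt y' x = true
      · rw [if_pos hlt] at hp
        simp at hp
        obtain ⟨rfl, rfl⟩ := hp
        constructor
        · exact (hperm'.cons x).trans (List.Perm.swap _ _ _)
        · intro z hz
          rcases List.mem_cons.mp hz with rfl | hz'
          · exact lexLt_asymm hlt
          · exact hmin' z hz'
      · rw [if_neg hlt] at hp
        simp at hp
        obtain ⟨rfl, rfl⟩ := hp
        refine ⟨List.Perm.refl _, fun z hz => ?_⟩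
        rcases List.mem_cons.mp hz with rfl | hz'
        · exact lexLt_irrefl _
        · exact lexLt_false_trans (Bool.eq_false_iff.mpr hlt) (hmin' z hz')

-- time matrix access
def tEnt (tm : List (List Int)) (c : Nat × Nat) : Int := (tm.getD c.1 []).getD c.2 (-1)

def Asg (tm : List (List Int)) (c : Nat × Nat) : Prop := tEnt tm c ≠ -1

def ShapeT (n m : Nat) (tm : List (List Int)) : Prop :=
  tm.length = n ∧ ∀ r ∈ tm, r.length = m

lemma row_len {n m : Nat} {tm : List (List Int)} (hs : ShapeT n m tm) {i : Nat} (hi : i < n) :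
    (tm.getD i []).length = m := by
  obtain ⟨hl, hr⟩ := hs
  have hi' : i < tm.length := by omega
  rw [List.getD_eq_getElem?_getD, List.getElem?_eq_getElem hi']
  exact hr _ (List.getElem_mem hi')

lemma tEnt_set_self {n m : Nat} {tm : List (List Int)} (hs : ShapeT n m tm) {c : Nat × Nat}
    (hc : InB n m c) (v : Int) : tEnt (pvSetT tm c.1 c.2 v) c = v := by
  have h1 : c.1 < tm.length := by have := hc.1; have hl := hs.1; omega
  unfold tEnt pvSetT
  have hrow : (tm.set c.1 ((tm.getD c.1 []).set c.2 v)).getD c.1 [] =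
      (tm.getD c.1 []).set c.2 v := by
    rw [List.getD_eq_getElem?_getD, List.getElem?_set_self h1]
    rfl
  rw [hrow, List.getD_eq_getElem?_getD,
    List.getElem?_set_self (by rw [row_len hs hc.1]; exact hc.2)]
  rfl

lemma tEnt_set_ne {tm : List (List Int)} {i j : Nat} {c' : Nat × Nat} (hne : c' ≠ (i, j))
    (v : Int) : tEnt (pvSetT tm i j v) c' = tEnt tm c' := by
  unfold tEnt pvSetT
  by_cases h1 : i = c'.1
  · subst h1
    have h2 : j ≠ c'.2 := fun h => hne (Prod.ext rfl h.symm)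
    by_cases hlen : c'.1 < tm.length
    · have hrow : (tm.set c'.1 ((tm.getD c'.1 []).set j v)).getD c'.1 [] =
          (tm.getD c'.1 []).set j v := by
        rw [List.getD_eq_getElem?_getD, List.getElem?_set_self hlen]
        rfl
      rw [hrow, List.getD_eq_getElem?_getD, List.getElem?_set_ne h2,
        ← List.getD_eq_getElem?_getD]
    · rw [List.set_eq_of_length_le (by omega)]
  · have hrow : (tm.set i ((tm.getD i []).set j v)).getD c'.1 [] = tm.getD c'.1 [] := by
      rw [List.getD_eq_getElem?_getD, List.getElem?_set_ne h1, ← List.getD_eq_getElem?_getD]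
    rw [hrow]

lemma shape_set {n m : Nat} {tm : List (List Int)} (hs : ShapeT n m tm) {i j : Nat}
    (hi : i < n) (v : Int) : ShapeT n m (pvSetT tm i j v) := by
  obtain ⟨hl, hr⟩ := hs
  refine ⟨by simp [pvSetT, hl], ?_⟩
  intro r hrm
  rcases List.mem_or_eq_of_mem_set hrm with h | h
  · exact hr r h
  · subst h
    rw [List.length_set]
    exact row_len ⟨hl, hr⟩ hi

-- ---------- A side: Dijkstra invariant ----------
def cellOf (e : Int × Int × Int) : Nat × Nat := (e.2.1.toNat, e.2.2.toNat)

def gridF (n m : Nat) : Finset (Nat × Nat) := Finset.range n ×ˢ Finset.range m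

structure AInv (mo : List (List Int)) (n m : Nat) (heap : List (Int × Int × Int))
    (tm : List (List Int)) (P : Finset (Nat × Nat)) : Prop where
  shape : ShapeT n m tm
  hmem : ∀ e ∈ heap, ∃ c : Nat × Nat, InB n m c ∧ Asg tm c ∧
    e = (tEnt tm c, ((c.1 : Int), (c.2 : Int)))
  hnodup : (heap.map cellOf).Nodup
  hcells : ∀ c : Nat × Nat, InB n m c → ((Asg tm c ∧ c ∉ P) ↔ c ∈ heap.map cellOf)
  hP : ∀ c ∈ P, InB n m c ∧ Asg tm c
  hsrc : tEnt tm (0, 0) = 0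
  hsrcP : P ≠ ∅ → (0, 0) ∈ P
  honly : P = ∅ → ∀ c : Nat × Nat, InB n m c → Asg tm c → c = (0, 0)
  hsound : ∀ c : Nat × Nat, InB n m c → Asg tm c →
    ∃ q, ValidW n m q ∧ EndsAt q c ∧ costW mo q = tEnt tm c
  hcomp : ∀ c : Nat × Nat, InB n m c → Asg tm c →
    ∀ q, ValidW n m q → EndsAt q c → tEnt tm c ≤ costW mo q
  hrel : ∀ u ∈ P, ∀ v : Nat × Nat, AdjC n m u v →
    Asg tm v ∧ tEnt tm v ≤ max (tEnt tm u) (Wt mo v) + 1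
  hmono : ∀ u ∈ P, ∀ e ∈ heap, tEnt tm u ≤ e.1
  hpar : ∀ c : Nat × Nat, InB n m c → Asg tm c → c ≠ (0, 0) →
    ∃ u ∈ P, AdjC n m u c ∧ tEnt tm c = max (tEnt tm u) (Wt mo c) + 1

-- the crucial lower bound: any walk ending outside the popped region costs at least
-- the key t of the cell u being popped
lemma lower_lemma {mo : List (List Int)} {n m : Nat} {tm : List (List Int)}
    {P : Finset (Nat × Nat)} {u : Nat × Nat} {t : Int}
    (hsrcP' : (0, 0) ∈ insert u P)
    (hPin : ∀ c ∈ P, InB n m c ∧ Asg tm c)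
    (huIn : InB n m u) (huAsg : Asg tm u) (ht : tEnt tm u = t)
    (hcomp : ∀ c : Nat × Nat, InB n m c → Asg tm c →
      ∀ q, ValidW n m q → EndsAt q c → tEnt tm c ≤ costW mo q)
    (hrel : ∀ p ∈ P, ∀ v : Nat × Nat, AdjC n m p v →
      Asg tm v ∧ tEnt tm v ≤ max (tEnt tm p) (Wt mo v) + 1)
    (hmin : ∀ z : Nat × Nat, InB n m z → Asg tm z → z ∉ insert u P → t ≤ tEnt tm z) :
    ∀ (q : List (Nat × Nat)) (w : Nat × Nat), ValidW n m q → EndsAt q w →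
      w ∉ insert u P → t ≤ costW mo q := by
  intro q
  induction hl : q.length using Nat.strong_induction_on generalizing q with
  | _ k ih =>
  intro w hq he hw
  rcases valid_decomp (mo := mo) hq he with ⟨rfl, rfl⟩ | ⟨q', pv, rfl, hq', he', hadj, hcost⟩
  · exact absurd hsrcP' hw
  · by_cases hpv : pv ∈ insert u P
    · rcases Finset.mem_insert.mp hpv with rfl | hpvP
      · have h1 : t ≤ costW mo q' := ht ▸ hcomp pv huIn huAsg q' hq' he'
        rw [hcost]; simp only [stepC]; omega
      · obtain ⟨hpvIn, hpvAsg⟩ := hPin pv hpvP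
        obtain ⟨hwAsg, hwle⟩ := (hrel pv hpvP w hadj)
        have h1 : tEnt tm pv ≤ costW mo q' := hcomp pv hpvIn hpvAsg q' hq' he'
        have h2 : t ≤ tEnt tm w := hmin w hadj.2.1 hwAsg hw
        rw [hcost]; simp only [stepC]; omega
    · have h1 := ih q'.length (by simp at hl; omega) q' rfl pv hq' he' hpv
      rw [hcost]; simp only [stepC]; omega

-- lower bound for a freshly relaxed cell: its assigned value is optimal
lemma new_comp {mo : List (List Int)} {n m : Nat} {tm : List (List Int)}
    {P : Finset (Nat × Nat)} {u : Nat × Nat} {t : Int}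
    (hsrc0 : tEnt tm (0, 0) = 0)
    (hsrcP' : (0, 0) ∈ insert u P)
    (hPin : ∀ c ∈ P, InB n m c ∧ Asg tm c)
    (huIn : InB n m u) (huAsg : Asg tm u) (ht : tEnt tm u = t)
    (hcomp : ∀ c : Nat × Nat, InB n m c → Asg tm c →
      ∀ q, ValidW n m q → EndsAt q c → tEnt tm c ≤ costW mo q)
    (hrel : ∀ p ∈ P, ∀ v : Nat × Nat, AdjC n m p v →
      Asg tm v ∧ tEnt tm v ≤ max (tEnt tm p) (Wt mo v) + 1)
    (hmin : ∀ z : Nat × Nat, InB n m z → Asg tm z → z ∉ insert u P → t ≤ tEnt tm z) :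
    ∀ v : Nat × Nat, InB n m v → ¬ Asg tm v → AdjC n m u v →
      ∀ q, ValidW n m q → EndsAt q v → max t (Wt mo v) + 1 ≤ costW mo q := by
  intro v hvIn hvN hadj q hq he
  rcases valid_decomp (mo := mo) hq he with ⟨rfl, hv0⟩ | ⟨q', pv, rfl, hq', he', hadj', hcost⟩
  · exact absurd (show Asg tm v by rw [hv0]; simp [Asg, hsrc0]) hvN
  · by_cases hpv : pv ∈ insert u P
    · rcases Finset.mem_insert.mp hpv with rfl | hpvP
      · have h1 : t ≤ costW mo q' := ht ▸ hcomp pv huIn huAsg q' hq' he'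
        rw [hcost]; simp only [stepC]; omega
      · exact absurd (hrel pv hpvP v hadj').1 hvN
    · have h1 := lower_lemma hsrcP' hPin huIn huAsg ht hcomp hrel hmin q' pv hq' he' hpv
      rw [hcost]; simp only [stepC]; omega

-- every already assigned cell satisfies the relaxation bound of the popped key
lemma bound_old {mo : List (List Int)} {n m : Nat} {tm : List (List Int)}
    {P : Finset (Nat × Nat)} {t : Int}
    (hsrc0 : tEnt tm (0, 0) = 0) (ht0 : 0 ≤ t)
    (hple : ∀ c ∈ P, tEnt tm c ≤ t)
    (hpar : ∀ c : Nat × Nat, InB n m c → Asg tm c → c ≠ (0, 0) →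
      ∃ p ∈ P, AdjC n m p c ∧ tEnt tm c = max (tEnt tm p) (Wt mo c) + 1) :
    ∀ v : Nat × Nat, InB n m v → Asg tm v → tEnt tm v ≤ max t (Wt mo v) + 1 := by
  intro v hvIn hvAsg
  by_cases hv0 : v = (0, 0)
  · rw [hv0, hsrc0]; omega
  · obtain ⟨p, hpP, _, heq⟩ := hpar v hvIn hvAsg hv0
    have := hple p hpP
    rw [heq]; omega

-- offsets of pvDirs realise exactly the grid adjacency
lemma dirs_adj {n m : Nat} {u : Nat × Nat} {d : Int × Int} (hd : d ∈ pvDirs)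
    (huIn : InB n m u)
    (hb : 0 ≤ (u.1 : Int) + d.1 ∧ (u.1 : Int) + d.1 < (n : Int) ∧
          0 ≤ (u.2 : Int) + d.2 ∧ (u.2 : Int) + d.2 < (m : Int)) :
    AdjC n m u (((u.1 : Int) + d.1).toNat, ((u.2 : Int) + d.2).toNat) := by
  obtain ⟨h1, h2, h3, h4⟩ := hb
  obtain ⟨hu1, hu2⟩ := huIn
  simp [pvDirs] at hd
  rcases hd with rfl | rfl | rfl | rfl <;> dsimp only at h1 h2 h3 h4 ⊢
  · exact ⟨⟨hu1, hu2⟩, ⟨by omega, by omega⟩, Or.inr ⟨by omega, Or.inr (by omega)⟩⟩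
  · exact ⟨⟨hu1, hu2⟩, ⟨by omega, by omega⟩, Or.inr ⟨by omega, Or.inl (by omega)⟩⟩
  · exact ⟨⟨hu1, hu2⟩, ⟨by omega, by omega⟩, Or.inl ⟨by omega, Or.inr (by omega)⟩⟩
  · exact ⟨⟨hu1, hu2⟩, ⟨by omega, by omega⟩, Or.inl ⟨by omega, Or.inl (by omega)⟩⟩

lemma adj_dirs {n m : Nat} {u v : Nat × Nat} (ha : AdjC n m u v) :
    ∃ d ∈ pvDirs, (v.1 : Int) = (u.1 : Int) + d.1 ∧ (v.2 : Int) = (u.2 : Int) + d.2 := by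
  obtain ⟨⟨hu1, hu2⟩, ⟨hv1, hv2⟩, hsh⟩ := ha
  rcases hsh with ⟨he, h | h⟩ | ⟨he, h | h⟩
  · exact ⟨(0, 1), by simp [pvDirs], by omega, by omega⟩
  · exact ⟨(0, -1), by simp [pvDirs], by omega, by omega⟩
  · exact ⟨(1, 0), by simp [pvDirs], by omega, by omega⟩
  · exact ⟨(-1, 0), by simp [pvDirs], by omega, by omega⟩

-- if the assigned set is closed under adjacency then it covers the whole grid
lemma closed_all {n m : Nat} {tm : List (List Int)} (hn : 0 < n) (hm : 0 < m)
    (hsrcA : Asg tm (0, 0))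
    (hclosed : ∀ c : Nat × Nat, InB n m c → Asg tm c →
      ∀ v : Nat × Nat, AdjC n m c v → Asg tm v) :
    ∀ c : Nat × Nat, InB n m c → Asg tm c := by
  have aux : ∀ (k : Nat) (q : List (Nat × Nat)) (v : Nat × Nat), q.length = k →
      ValidW n m q → EndsAt q v → Asg tm v := by
    intro k
    induction k using Nat.strong_induction_on with
    | _ k ih =>
    intro q v hl hq he
    rcases valid_decomp (mo := []) hq he with ⟨rfl, rfl⟩ | ⟨q', pv, rfl, hq', he', hadj, _⟩
    · exact hsrcA
    · have h1 : Asg tm pv := ih q'.length (by simp at hl; omega) q' pv rfl hq' he'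
      exact hclosed pv hadj.1 h1 v hadj
  intro c hc
  obtain ⟨q, hq, he, _⟩ := conn_walk hn hm c.1 c.2 hc.1 hc.2
  exact aux q.length q c rfl hq (by cases c; exact he)

structure OldCtx (mo : List (List Int)) (n m : Nat) (u : Nat × Nat) (t : Int)
    (tmOld : List (List Int)) (P : Finset (Nat × Nat)) : Prop where
  hn : 0 < n
  hm : 0 < m
  huIn : InB n m u
  huAsg : Asg tmOld u
  ht : tEnt tmOld u = t
  ht0 : 0 ≤ t
  hsrc0 : tEnt tmOld (0, 0) = 0
  hsrcP' : (0, 0) ∈ insert u P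
  hPin : ∀ c ∈ P, InB n m c ∧ Asg tmOld c
  hcompO : ∀ c : Nat × Nat, InB n m c → Asg tmOld c →
    ∀ q, ValidW n m q → EndsAt q c → tEnt tmOld c ≤ costW mo q
  hrelO : ∀ p ∈ P, ∀ v : Nat × Nat, AdjC n m p v →
    Asg tmOld v ∧ tEnt tmOld v ≤ max (tEnt tmOld p) (Wt mo v) + 1
  hminO : ∀ z : Nat × Nat, InB n m z → Asg tmOld z → z ∉ insert u P → t ≤ tEnt tmOld z
  hpleO : ∀ c ∈ P, tEnt tmOld c ≤ t
  hboundO : ∀ v : Nat × Nat, InB n m v → Asg tmOld v → tEnt tmOld v ≤ max t (Wt mo v) + 1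

structure Mid (mo : List (List Int)) (n m : Nat) (u : Nat × Nat) (t : Int)
    (tmOld : List (List Int)) (P : Finset (Nat × Nat)) (rem : List (Int × Int))
    (hp : List (Int × Int × Int)) (tm : List (List Int)) : Prop where
  shape : ShapeT n m tm
  frame : ∀ c : Nat × Nat, InB n m c → tEnt tm c = tEnt tmOld c ∨
    (¬ Asg tmOld c ∧ AdjC n m u c ∧ tEnt tm c = max t (Wt mo c) + 1)
  hmem : ∀ e ∈ hp, ∃ c : Nat × Nat, InB n m c ∧ Asg tm c ∧
    e = (tEnt tm c, ((c.1 : Int), (c.2 : Int)))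
  hnodup : (hp.map cellOf).Nodup
  hcells : ∀ c : Nat × Nat, InB n m c → ((Asg tm c ∧ c ∉ insert u P) ↔ c ∈ hp.map cellOf)
  hmono : ∀ cP ∈ insert u P, ∀ e ∈ hp, tEnt tm cP ≤ e.1
  hsound : ∀ c : Nat × Nat, InB n m c → Asg tm c →
    ∃ q, ValidW n m q ∧ EndsAt q c ∧ costW mo q = tEnt tm c
  hcomp : ∀ c : Nat × Nat, InB n m c → Asg tm c →
    ∀ q, ValidW n m q → EndsAt q c → tEnt tm c ≤ costW mo q
  hrelP : ∀ p ∈ P, ∀ v : Nat × Nat, AdjC n m p v →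
    Asg tm v ∧ tEnt tm v ≤ max (tEnt tm p) (Wt mo v) + 1
  hrelU : ∀ v : Nat × Nat, AdjC n m u v →
    (∃ dxy ∈ rem, (v.1 : Int) = (u.1 : Int) + dxy.1 ∧ (v.2 : Int) = (u.2 : Int) + dxy.2) ∨
    (Asg tm v ∧ tEnt tm v ≤ max t (Wt mo v) + 1)
  hpar : ∀ c : Nat × Nat, InB n m c → Asg tm c → c ≠ (0, 0) →
    ∃ p ∈ insert u P, AdjC n m p c ∧ tEnt tm c = max (tEnt tm p) (Wt mo c) + 1

lemma not_asg_iff {tm : List (List Int)} {c : Nat × Nat} : ¬ Asg tm c ↔ tEnt tm c = -1 := by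
  simp [Asg]

lemma Mid.frame_asg {mo n m u t tmOld P rem hp tm}
    (mid : Mid mo n m u t tmOld P rem hp tm) {c : Nat × Nat} (hcIn : InB n m c)
    (hAsgOld : Asg tmOld c) : tEnt tm c = tEnt tmOld c := by
  rcases mid.frame c hcIn with h | ⟨hno, _, _⟩
  · exact h
  · exact absurd hAsgOld hno

lemma Mid.asg_of_old {mo n m u t tmOld P rem hp tm}
    (mid : Mid mo n m u t tmOld P rem hp tm) {c : Nat × Nat} (hcIn : InB n m c)
    (hAsgOld : Asg tmOld c) : Asg tm c := by
  rw [Asg, mid.frame_asg hcIn hAsgOld]; exact hAsgOld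

lemma pvRelax_pos {mo : List (List Int)} {n m : Nat} {t x y : Int}
    {hp : List (Int × Int × Int)} {tm : List (List Int)} {d : Int × Int}
    (h : 0 ≤ x + d.1 ∧ x + d.1 < (n : Int) ∧ 0 ≤ y + d.2 ∧ y + d.2 < (m : Int) ∧
      pvGetT tm (x + d.1).toNat (y + d.2).toNat = -1) :
    pvRelax mo n m t x y (hp, tm) d =
      ((max t ((mo.getD (x + d.1).toNat []).getD (y + d.2).toNat 0) + 1, x + d.1, y + d.2) :: hp,
       pvSetT tm (x + d.1).toNat (y + d.2).toNat
         (max t ((mo.getD (x + d.1).toNat []).getD (y + d.2).toNat 0) + 1)) := by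
  unfold pvRelax
  rw [if_pos h]

lemma pvRelax_neg {mo : List (List Int)} {n m : Nat} {t x y : Int}
    {hp : List (Int × Int × Int)} {tm : List (List Int)} {d : Int × Int}
    (h : ¬ (0 ≤ x + d.1 ∧ x + d.1 < (n : Int) ∧ 0 ≤ y + d.2 ∧ y + d.2 < (m : Int) ∧
      pvGetT tm (x + d.1).toNat (y + d.2).toNat = -1)) :
    pvRelax mo n m t x y (hp, tm) d = (hp, tm) := by
  unfold pvRelax
  rw [if_neg h]

lemma relax_step {mo : List (List Int)} {n m : Nat} {u : Nat × Nat} {t : Int}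
    {tmOld : List (List Int)} {P : Finset (Nat × Nat)} (ctx : OldCtx mo n m u t tmOld P)
    {rem : List (Int × Int)} {d : Int × Int} (hd : d ∈ pvDirs)
    {hp : List (Int × Int × Int)} {tm : List (List Int)}
    (mid : Mid mo n m u t tmOld P (d :: rem) hp tm) :
    Mid mo n m u t tmOld P rem
      (pvRelax mo n m t (u.1 : Int) (u.2 : Int) (hp, tm) d).1
      (pvRelax mo n m t (u.1 : Int) (u.2 : Int) (hp, tm) d).2 := by
  by_cases hg : 0 ≤ (u.1 : Int) + d.1 ∧ (u.1 : Int) + d.1 < (n : Int) ∧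
      0 ≤ (u.2 : Int) + d.2 ∧ (u.2 : Int) + d.2 < (m : Int) ∧
      pvGetT tm ((u.1 : Int) + d.1).toNat ((u.2 : Int) + d.2).toNat = -1
  · -- the neighbour is in bounds and unassigned: it gets assigned and pushed
    obtain ⟨h1, h2, h3, h4, h5⟩ := hg
    set w : Nat × Nat := (((u.1 : Int) + d.1).toNat, ((u.2 : Int) + d.2).toNat) with hw
    have hwk1 : (w.1 : Int) = (u.1 : Int) + d.1 := by simp [hw]; omega
    have hwk2 : (w.2 : Int) = (u.2 : Int) + d.2 := by simp [hw]; omega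
    have hwIn : InB n m w := ⟨by simp [hw]; omega, by simp [hw]; omega⟩
    have hadjW : AdjC n m u w := dirs_adj hd ctx.huIn ⟨h1, h2, h3, h4⟩
    have hwN : ¬ Asg tm w := not_asg_iff.mpr h5
    have hwNold : ¬ Asg tmOld w := by
      rcases mid.frame w hwIn with h | ⟨hno, _, _⟩
      · rw [not_asg_iff] at hwN ⊢; rw [← h]; exact hwN
      · exact hno
    set nt : Int := max t (Wt mo w) + 1 with hntdef
    have hnt0 : 0 < nt := by rw [hntdef]; have := ctx.ht0; omega
    set tm' : List (List Int) := pvSetT tm w.1 w.2 nt with htm'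
    have hshape' : ShapeT n m tm' := shape_set mid.shape hwIn.1 nt
    have hents : tEnt tm' w = nt := tEnt_set_self mid.shape hwIn nt
    have hentne : ∀ c : Nat × Nat, c ≠ w → tEnt tm' c = tEnt tm c := by
      intro c hc
      exact tEnt_set_ne (by rw [Prod.mk.eta]; exact hc) nt
    have hwAsg' : Asg tm' w := by rw [Asg, hents]; omega
    have huAsgTm : Asg tm u := mid.asg_of_old ctx.huIn ctx.huAsg
    have huNe : u ≠ w := fun h => hwN (h ▸ huAsgTm)
    have htu : tEnt tm u = t := by rw [mid.frame_asg ctx.huIn ctx.huAsg, ctx.ht]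
    have htu' : tEnt tm' u = t := by rw [hentne u huNe, htu]
    have hPne : ∀ p ∈ P, p ≠ w := by
      intro p hp' h
      exact hwN (h ▸ mid.asg_of_old (ctx.hPin p hp').1 (ctx.hPin p hp').2)
    have hPasg' : ∀ p ∈ P, Asg tm' p ∧ tEnt tm' p = tEnt tm p := by
      intro p hp'
      have h1' := hentne p (hPne p hp')
      have h2' := mid.asg_of_old (ctx.hPin p hp').1 (ctx.hPin p hp').2
      exact ⟨by rw [Asg, h1']; exact h2', h1'⟩
    have hasg_pres : ∀ c : Nat × Nat, Asg tm c → Asg tm' c ∧ tEnt tm' c = tEnt tm c := by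
      intro c hc
      have hne : c ≠ w := fun h => hwN (h ▸ hc)
      exact ⟨by rw [Asg, hentne c hne]; exact hc, hentne c hne⟩
    have hasg_cases : ∀ c : Nat × Nat, Asg tm' c → (Asg tm c ∧ tEnt tm' c = tEnt tm c) ∨ c = w := by
      intro c hc
      by_cases h : c = w
      · exact Or.inr h
      · exact Or.inl ⟨by rw [Asg, ← hentne c h]; exact hc, hentne c h⟩
    have hwNotP' : w ∉ insert u P := by
      intro h
      rcases Finset.mem_insert.mp h with h | h
      · exact huNe h.symm
      · exact hPne w h rfl
    have hcw : cellOf (nt, (u.1 : Int) + d.1, (u.2 : Int) + d.2) = w := by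
      dsimp [cellOf]
    rw [pvRelax_pos ⟨h1, h2, h3, h4, h5⟩]
    show Mid mo n m u t tmOld P rem ((nt, (u.1 : Int) + d.1, (u.2 : Int) + d.2) :: hp) tm'
    refine ⟨hshape', ?_, ?_, ?_, ?_, ?_, ?_, ?_, ?_, ?_, ?_⟩
    · -- frame
      intro c hcIn
      by_cases h : c = w
      · subst h
        exact Or.inr ⟨hwNold, hadjW, hents⟩
      · rw [hentne c h]
        exact mid.frame c hcIn
    · -- hmem
      intro e he
      rcases List.mem_cons.mp he with rfl | he'
      · exact ⟨w, hwIn, hwAsg', by rw [hents, hwk1, hwk2]⟩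
      · obtain ⟨c, hcIn, hcAsg, rfl⟩ := mid.hmem e he'
        exact ⟨c, hcIn, (hasg_pres c hcAsg).1, by rw [(hasg_pres c hcAsg).2]⟩
    · -- hnodup
      simp only [List.map_cons]
      refine List.Nodup.cons ?_ mid.hnodup
      intro hmem'
      rw [hcw] at hmem'
      exact hwN ((mid.hcells w hwIn).mpr hmem').1
    · -- hcells
      intro c hcIn
      by_cases h : c = w
      · subst h
        constructor
        · intro _
          simp only [List.map_cons, List.mem_cons]
          exact Or.inl hcw.symm
        · intro _
          exact ⟨hwAsg', hwNotP'⟩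
      · have h1 : Asg tm' c ↔ Asg tm c := by rw [Asg, Asg, hentne c h]
        rw [List.map_cons, List.mem_cons]
        have hcw : cellOf (nt, (u.1 : Int) + d.1, (u.2 : Int) + d.2) = w := by
          simp [cellOf, hw]
        rw [hcw]
        constructor
        · intro ⟨ha, hb⟩
          exact Or.inr ((mid.hcells c hcIn).mp ⟨h1.mp ha, hb⟩)
        · intro hor
          rcases hor with h' | h'
          · exact absurd h' h
          · obtain ⟨ha, hb⟩ := (mid.hcells c hcIn).mpr h'
            exact ⟨h1.mpr ha, hb⟩
    · -- hmono
      intro cP hcP e he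
      have hcPv : tEnt tm' cP ≤ t := by
        rcases Finset.mem_insert.mp hcP with rfl | h'
        · rw [htu']
        · rw [(hPasg' cP h').2, mid.frame_asg (ctx.hPin cP h').1 (ctx.hPin cP h').2]
          exact ctx.hpleO cP h'
      rcases List.mem_cons.mp he with rfl | he'
      · show tEnt tm' cP ≤ nt
        rw [hntdef]
        omega
      · refine le_trans hcPv ?_
        have h2 := mid.hmono u (Finset.mem_insert_self u P) e he'
        rw [htu] at h2
        exact h2
    · -- hsound
      intro c hcIn hcAsg
      rcases hasg_cases c hcAsg with ⟨ha, hv⟩ | rfl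
      · obtain ⟨q, hq, he, hc⟩ := mid.hsound c hcIn ha
        exact ⟨q, hq, he, by rw [hc, hv]⟩
      · obtain ⟨q, hq, he, hc⟩ := mid.hsound u ctx.huIn huAsgTm
        obtain ⟨hq', he'⟩ := valid_snoc hq he hadjW
        refine ⟨q ++ [w], hq', he', ?_⟩
        rw [costW_snoc mo (valid_ne_nil hq) _, hc, htu, hents, hntdef]
        rfl
    · -- hcomp
      intro c hcIn hcAsg q hq he
      rcases hasg_cases c hcAsg with ⟨ha, hv⟩ | rfl
      · rw [hv]
        exact mid.hcomp c hcIn ha q hq he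
      · rw [hents, hntdef]
        exact new_comp ctx.hsrc0 ctx.hsrcP' ctx.hPin ctx.huIn ctx.huAsg ctx.ht ctx.hcompO
          ctx.hrelO ctx.hminO w hcIn hwNold hadjW q hq he
    · -- hrelP
      intro p hp' v hadj
      obtain ⟨hvAsg, hvle⟩ := mid.hrelP p hp' v hadj
      obtain ⟨ha, hv⟩ := hasg_pres v hvAsg
      exact ⟨ha, by rw [hv, (hPasg' p hp').2]; exact hvle⟩
    · -- hrelU
      intro v hadj
      rcases mid.hrelU v hadj with ⟨dxy, hdxy, hco⟩ | ⟨hvAsg, hvle⟩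
      · rcases List.mem_cons.mp hdxy with rfl | hdxy'
        · -- the direction just processed: v = w, freshly assigned with the exact bound
          have hvw : v = w := by
            have e1 : (v.1 : Int) = (w.1 : Int) := by rw [hco.1, hwk1]
            have e2 : (v.2 : Int) = (w.2 : Int) := by rw [hco.2, hwk2]
            exact Prod.ext (by exact_mod_cast e1) (by exact_mod_cast e2)
          subst hvw
          exact Or.inr ⟨hwAsg', by rw [hents]⟩
        · exact Or.inl ⟨dxy, hdxy', hco⟩
      · obtain ⟨ha, hv⟩ := hasg_pres v hvAsg
        exact Or.inr ⟨ha, by rw [hv]; exact hvle⟩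
    · -- hpar
      intro c hcIn hcAsg hc0
      rcases hasg_cases c hcAsg with ⟨ha, hv⟩ | rfl
      · obtain ⟨p, hpP, hadj, heq⟩ := mid.hpar c hcIn ha hc0
        refine ⟨p, hpP, hadj, ?_⟩
        have hpv : tEnt tm' p = tEnt tm p := by
          rcases Finset.mem_insert.mp hpP with rfl | h'
          · exact hentne p huNe
          · exact (hPasg' p h').2
        rw [hv, hpv]
        exact heq
      · exact ⟨u, Finset.mem_insert_self u P, hadjW, by rw [hents, htu']⟩
  · -- out of bounds or already assigned: the state is unchanged
    rw [pvRelax_neg hg]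
    refine ⟨mid.shape, mid.frame, mid.hmem, mid.hnodup, mid.hcells, mid.hmono, mid.hsound,
      mid.hcomp, mid.hrelP, ?_, mid.hpar⟩
    intro v hadj
    rcases mid.hrelU v hadj with ⟨dxy, hdxy, hco⟩ | hr
    · rcases List.mem_cons.mp hdxy with rfl | hdxy'
      · have hvIn := hadj.2.1
        have hv1 := hvIn.1
        have hv2 := hvIn.2
        have hc1 := hco.1
        have hc2 := hco.2
        have hne : pvGetT tm ((u.1 : Int) + dxy.1).toNat ((u.2 : Int) + dxy.2).toNat ≠ -1 := by
          intro h5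
          exact hg ⟨by omega, by omega, by omega, by omega, h5⟩
        have hidx1 : ((u.1 : Int) + dxy.1).toNat = v.1 := by omega
        have hidx2 : ((u.2 : Int) + dxy.2).toNat = v.2 := by omega
        rw [hidx1, hidx2] at hne
        have hvAsg : Asg tm v := hne
        refine Or.inr ⟨hvAsg, ?_⟩
        rcases mid.frame v hvIn with hfr | ⟨_, _, hval⟩
        · by_cases hvo : Asg tmOld v
          · rw [hfr]
            exact ctx.hboundO v hvIn hvo
          · rw [not_asg_iff] at hvo
            exact absurd (hfr.trans hvo) hvAsg
        · rw [hval]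
      · exact Or.inl ⟨dxy, hdxy', hco⟩
    · exact Or.inr hr

lemma relax_fold {mo : List (List Int)} {n m : Nat} {u : Nat × Nat} {t : Int}
    {tmOld : List (List Int)} {P : Finset (Nat × Nat)} (ctx : OldCtx mo n m u t tmOld P) :
    ∀ (rem : List (Int × Int)), (∀ dxy ∈ rem, dxy ∈ pvDirs) →
      ∀ (hp : List (Int × Int × Int)) (tm : List (List Int)),
        Mid mo n m u t tmOld P rem hp tm →
        Mid mo n m u t tmOld P []
          (rem.foldl (pvRelax mo n m t (u.1 : Int) (u.2 : Int)) (hp, tm)).1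
          (rem.foldl (pvRelax mo n m t (u.1 : Int) (u.2 : Int)) (hp, tm)).2 := by
  intro rem
  induction rem with
  | nil => intro _ hp tm mid; exact mid
  | cons d rem ih =>
    intro hdirs hp tm mid
    have hstep := relax_step ctx (hdirs d (by simp)) mid
    have := ih (fun dxy hdxy => hdirs dxy (by simp [hdxy])) _ _ hstep
    simpa using this

lemma cellOf_cast (c : Nat × Nat) (t : Int) : cellOf (t, ((c.1 : Int), (c.2 : Int))) = c := by
  simp [cellOf]

lemma loopA_inv {mo : List (List Int)} {n m : Nat} (hn : 0 < n) (hm : 0 < m) :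
    ∀ (fuel : Nat) (heap : List (Int × Int × Int)) (tm : List (List Int)) (P : Finset (Nat × Nat)),
      AInv mo n m heap tm P → n * m ≤ fuel + P.card →
      (∃ heap' P', AInv mo n m heap' (pvLoopA mo n m fuel heap tm) P') ∧
        Asg (pvLoopA mo n m fuel heap tm) (n - 1, m - 1) := by
  intro fuel
  induction fuel with
  | zero =>
    intro heap tm P inv hfuel
    have hsub : P ⊆ gridF n m := by
      intro c hc
      have h1 := (inv.hP c hc).1
      simp [gridF, Finset.mem_product]
      exact ⟨h1.1, h1.2⟩
    have hcard : (gridF n m).card = n * m := by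
      simp [gridF]
    have hPeq : P = gridF n m := Finset.eq_of_subset_of_card_le hsub (by omega)
    have hend : ((n - 1 : Nat), (m - 1 : Nat)) ∈ P := by
      rw [hPeq]
      simp [gridF, Finset.mem_product]
      omega
    exact ⟨⟨heap, P, inv⟩, (inv.hP _ hend).2⟩
  | succ fuel ih =>
    intro heap tm P inv hfuel
    by_cases hguard : pvGetT tm (n - 1) (m - 1) = -1
    · -- the goal cell is still unassigned: pop and relax
      have hheapne : heap ≠ [] := by
        intro h0
        have hclosed : ∀ c : Nat × Nat, InB n m c → Asg tm c →
            ∀ v : Nat × Nat, AdjC n m c v → Asg tm v := by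
          intro c hcIn hcAsg v hadj
          by_cases hcP : c ∈ P
          · exact (inv.hrel c hcP v hadj).1
          · have h1 := (inv.hcells c hcIn).mp ⟨hcAsg, hcP⟩
            rw [h0] at h1
            simp at h1
        have hAsgEnd := closed_all hn hm (by rw [Asg, inv.hsrc]; omega) hclosed
          (n - 1, m - 1) ⟨by omega, by omega⟩
        exact hAsgEnd hguard
      cases hpop : pvPopMin heap with
      | none => exact absurd (popMin_eq_none hpop) hheapne
      | some pr =>
      obtain ⟨⟨t, x, y⟩, rest⟩ := pr
      obtain ⟨hperm, hmin⟩ := popMin_spec heap (t, x, y) rest hpop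
      have hein : (t, x, y) ∈ heap := (hperm.mem_iff).mpr (by simp)
      obtain ⟨u, huIn, huAsg, heq⟩ := inv.hmem _ hein
      have ht : t = tEnt tm u := congrArg Prod.fst heq
      have hx : x = (u.1 : Int) := congrArg (fun p => p.2.1) heq
      have hy : y = (u.2 : Int) := congrArg (fun p => p.2.2) heq
      subst ht hx hy
      have hucell : cellOf (tEnt tm u, ((u.1 : Int), (u.2 : Int))) = u := cellOf_cast u _
      have humem : u ∈ heap.map cellOf := List.mem_map.mpr ⟨_, hein, hucell⟩
      have huNotP : u ∉ P := ((inv.hcells u huIn).mpr humem).2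
      have ht0 : 0 ≤ tEnt tm u := by
        obtain ⟨q, _, _, hc⟩ := inv.hsound u huIn huAsg
        rw [← hc]
        exact costW_nonneg mo q
      have hpleO : ∀ c ∈ P, tEnt tm c ≤ tEnt tm u := by
        intro c hc
        exact inv.hmono c hc _ hein
      have hminO : ∀ z : Nat × Nat, InB n m z → Asg tm z → z ∉ insert u P →
          tEnt tm u ≤ tEnt tm z := by
        intro z hzIn hzAsg hz
        have hzP : z ∉ P := fun h => hz (Finset.mem_insert_of_mem h)
        obtain ⟨e', he', hce'⟩ := List.mem_map.mp ((inv.hcells z hzIn).mp ⟨hzAsg, hzP⟩)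
        obtain ⟨c', hc'In, hc'Asg, rfl⟩ := inv.hmem e' he'
        rw [cellOf_cast] at hce'
        subst hce'
        exact lexLt_false_fst (hmin _ he')
      have hsrcP' : ((0 : Nat), (0 : Nat)) ∈ insert u P := by
        by_cases hP0 : P = ∅
        · rw [← inv.honly hP0 u huIn huAsg]
          exact Finset.mem_insert_self u P
        · exact Finset.mem_insert_of_mem (inv.hsrcP hP0)
      have hboundO := bound_old inv.hsrc ht0 hpleO inv.hpar
      have ctx : OldCtx mo n m u (tEnt tm u) tm P :=
        ⟨hn, hm, huIn, huAsg, rfl, ht0, inv.hsrc, hsrcP', inv.hP, inv.hcomp, inv.hrel,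
          hminO, hpleO, hboundO⟩
      have hrestmem : ∀ e ∈ rest, e ∈ heap := by
        intro e he
        exact (hperm.mem_iff).mpr (by simp [he])
      have hnodup' : ((( tEnt tm u, ((u.1 : Int), (u.2 : Int))) :: rest).map cellOf).Nodup :=
        ((hperm.map cellOf).nodup_iff).mp inv.hnodup
      have mid0 : Mid mo n m u (tEnt tm u) tm P pvDirs rest tm := by
        refine ⟨inv.shape, fun c _ => Or.inl rfl, ?_, ?_, ?_, ?_, inv.hsound, inv.hcomp,
          inv.hrel, ?_, ?_⟩
        · intro e he
          exact inv.hmem e (hrestmem e he)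
        · exact hnodup'.of_cons
        · intro c hcIn
          have base := inv.hcells c hcIn
          have hperm' : List.Perm (heap.map cellOf)
              (cellOf (tEnt tm u, ((u.1 : Int), (u.2 : Int))) :: rest.map cellOf) := by
            simpa using hperm.map cellOf
          constructor
          · intro ⟨hA, hniP'⟩
            have hcu : c ≠ u := fun h => hniP' (h ▸ Finset.mem_insert_self u P)
            have h1 := base.mp ⟨hA, fun h => hniP' (Finset.mem_insert_of_mem h)⟩
            have h2 := hperm'.mem_iff.mp h1
            rw [hucell] at h2
            rcases List.mem_cons.mp h2 with h3 | h3
            · exact absurd h3 hcu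
            · exact h3
          · intro hcr
            have h1 : c ∈ heap.map cellOf := hperm'.mem_iff.mpr (by simp [hcr])
            have h2 := base.mpr h1
            have hnodup2 : (u :: rest.map cellOf).Nodup := by
              simpa [hucell] using hnodup'
            have hcu : c ≠ u := by
              intro h
              exact (List.nodup_cons.mp hnodup2).1 (h ▸ hcr)
            refine ⟨h2.1, ?_⟩
            intro h3
            rcases Finset.mem_insert.mp h3 with h4 | h4
            · exact hcu h4
            · exact h2.2 h4
        · intro cP hcP e he
          rcases Finset.mem_insert.mp hcP with rfl | h'
          · exact lexLt_false_fst (hmin _ (hrestmem e he))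
          · exact inv.hmono cP h' e (hrestmem e he)
        · intro v hadj
          exact Or.inl (adj_dirs hadj)
        · intro c hcIn hcAsg hc0
          obtain ⟨p, hpP, hadj, heq'⟩ := inv.hpar c hcIn hcAsg hc0
          exact ⟨p, Finset.mem_insert_of_mem hpP, hadj, heq'⟩
      have M := relax_fold ctx pvDirs (fun _ h => h) rest tm mid0
      have hAsgU' : Asg (pvDirs.foldl (pvRelax mo n m (tEnt tm u) (u.1 : Int) (u.2 : Int))
          (rest, tm)).2 u := M.asg_of_old huIn huAsg
      have htu'' : tEnt (pvDirs.foldl (pvRelax mo n m (tEnt tm u) (u.1 : Int) (u.2 : Int))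
          (rest, tm)).2 u = tEnt tm u := M.frame_asg huIn huAsg
      have inv' : AInv mo n m
          (pvDirs.foldl (pvRelax mo n m (tEnt tm u) (u.1 : Int) (u.2 : Int)) (rest, tm)).1
          (pvDirs.foldl (pvRelax mo n m (tEnt tm u) (u.1 : Int) (u.2 : Int)) (rest, tm)).2
          (insert u P) := by
        refine ⟨M.shape, M.hmem, M.hnodup, M.hcells, ?_, ?_, fun _ => hsrcP',
          fun h => absurd h (Finset.insert_ne_empty u P), M.hsound, M.hcomp, ?_, M.hmono,
          M.hpar⟩
        · intro c hc
          rcases Finset.mem_insert.mp hc with rfl | h'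
          · exact ⟨huIn, hAsgU'⟩
          · exact ⟨(inv.hP c h').1, M.asg_of_old (inv.hP c h').1 (inv.hP c h').2⟩
        · rw [M.frame_asg ⟨hn, hm⟩ (by rw [Asg, inv.hsrc]; omega)]
          exact inv.hsrc
        · intro p hpP v hadj
          rcases Finset.mem_insert.mp hpP with rfl | h'
          · rcases M.hrelU v hadj with ⟨dxy, hdxy, _⟩ | ⟨hA, hle⟩
            · exact absurd hdxy (List.not_mem_nil)
            · exact ⟨hA, by rw [htu'']; exact hle⟩
          · exact M.hrelP p h' v hadj
      have hstep : pvLoopA mo n m (fuel + 1) heap tm =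
          pvLoopA mo n m fuel
            (pvDirs.foldl (pvRelax mo n m (tEnt tm u) (u.1 : Int) (u.2 : Int)) (rest, tm)).1
            (pvDirs.foldl (pvRelax mo n m (tEnt tm u) (u.1 : Int) (u.2 : Int)) (rest, tm)).2 := by
        show (if pvGetT tm (n - 1) (m - 1) = -1 then
            match pvPopMin heap with
            | none => tm
            | some ((t, x, y), rest) =>
              let st := pvDirs.foldl (pvRelax mo n m t x y) (rest, tm)
              pvLoopA mo n m fuel st.1 st.2
          else tm) = _
        rw [if_pos hguard, hpop]
      rw [hstep]
      have hcard : (insert u P).card = P.card + 1 := Finset.card_insert_of_notMem huNotP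
      exact ih _ _ (insert u P) inv' (by omega)
    · -- the goal cell is assigned: the loop stops
      have heq : pvLoopA mo n m (fuel + 1) heap tm = tm := by
        show (if pvGetT tm (n - 1) (m - 1) = -1 then
            match pvPopMin heap with
            | none => tm
            | some ((t, x, y), rest) =>
              let st := pvDirs.foldl (pvRelax mo n m t x y) (rest, tm)
              pvLoopA mo n m fuel st.1 st.2
          else tm) = tm
        rw [if_neg hguard]
      rw [heq]
      exact ⟨⟨heap, P, inv⟩, hguard⟩

lemma tEnt_replicate {n m : Nat} (c : Nat × Nat) :
    tEnt (List.replicate n (List.replicate m (-1 : Int))) c = -1 := by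
  unfold tEnt
  have hrow : (List.replicate n (List.replicate m (-1 : Int))).getD c.1 [] =
      (if c.1 < n then List.replicate m (-1 : Int) else []) := by
    rw [List.getD_eq_getElem?_getD, List.getElem?_replicate]
    split_ifs <;> rfl
  rw [hrow]
  split_ifs
  · rw [List.getD_eq_getElem?_getD, List.getElem?_replicate]
    split_ifs <;> rfl
  · simp

lemma AInv_init {mo : List (List Int)} {n m : Nat} (hn : 0 < n) (hm : 0 < m) :
    AInv mo n m [(0, 0, 0)]
      (pvSetT (List.replicate n (List.replicate m (-1 : Int))) 0 0 0) ∅ := by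
  have hshape0 : ShapeT n m (List.replicate n (List.replicate m (-1 : Int))) :=
    ⟨by simp, by intro r hr; rw [List.eq_of_mem_replicate hr]; simp⟩
  set tm1 := pvSetT (List.replicate n (List.replicate m (-1 : Int))) 0 0 0 with htm1
  have hshape : ShapeT n m tm1 := shape_set hshape0 hn 0
  have hsrc : tEnt tm1 ((0 : Nat), (0 : Nat)) = 0 :=
    tEnt_set_self hshape0 (c := ((0 : Nat), (0 : Nat))) ⟨hn, hm⟩ 0
  have hother : ∀ c : Nat × Nat, c ≠ (0, 0) → tEnt tm1 c = -1 := by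
    intro c hc
    rw [htm1, tEnt_set_ne hc 0, tEnt_replicate]
  have hA : ∀ c : Nat × Nat, Asg tm1 c ↔ c = (0, 0) := by
    intro c
    constructor
    · intro h
      by_contra hc
      exact h (hother c hc)
    · intro h
      rw [h, Asg, hsrc]
      omega
  refine ⟨hshape, ?_, by simp, ?_, by simp, hsrc, by simp, ?_, ?_, ?_, by simp, by simp, ?_⟩
  · intro e he
    simp at he
    subst he
    refine ⟨(0, 0), ⟨hn, hm⟩, (hA _).mpr rfl, ?_⟩
    rw [hsrc]
    rfl
  · intro c hcIn
    simp only [Finset.notMem_empty, not_false_iff, and_true, List.map_cons, List.map_nil]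
    rw [hA]
    constructor
    · intro h; simp [cellOf, h]
    · intro h
      simp [cellOf] at h
      exact h
  · intro _ c _ hcA
    exact (hA c).mp hcA
  · intro c _ hcA
    obtain rfl := (hA c).mp hcA
    exact ⟨[(0, 0)], ⟨rfl, by simp⟩, by simp [EndsAt], by simp [costW, costFrom, hsrc]⟩
  · intro c _ hcA q hq he
    obtain rfl := (hA c).mp hcA
    rw [hsrc]
    exact costW_nonneg mo q
  · intro c _ hcA hc0
    exact absurd ((hA c).mp hcA) hc0

lemma solve_minD {mo : List (List Int)} (hpre : Pre_solve mo) :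
    MinD mo mo.length (mo.headD []).length
      (mo.length - 1, (mo.headD []).length - 1) (solve mo) := by
  obtain ⟨hne, hm1, _⟩ := hpre
  have hn : 0 < mo.length := List.length_pos_iff.mpr hne
  have hm : 0 < (mo.headD []).length := hm1
  obtain ⟨⟨heap', P', inv'⟩, hend⟩ := loopA_inv hn hm (mo.length * (mo.headD []).length + 1)
    [(0, 0, 0)]
    (pvSetT (List.replicate mo.length (List.replicate (mo.headD []).length (-1 : Int))) 0 0 0)
    ∅ (AInv_init hn hm) (by simp)
  have hval : solve mo = tEnt
      (pvLoopA mo mo.length (mo.headD []).length (mo.length * (mo.headD []).length + 1)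
        [(0, 0, 0)]
        (pvSetT (List.replicate mo.length (List.replicate (mo.headD []).length (-1 : Int))) 0 0 0))
      (mo.length - 1, (mo.headD []).length - 1) := by
    simp only [solve]
    rfl
  have hendIn : InB mo.length (mo.headD []).length
      (mo.length - 1, (mo.headD []).length - 1) := ⟨by omega, by omega⟩
  refine ⟨?_, ?_⟩
  · obtain ⟨q, hq, he, hc⟩ := inv'.hsound _ hendIn hend
    exact ⟨q, hq, he, by rw [hc, ← hval]⟩
  · intro q hq he
    rw [hval]
    exact inv'.hcomp _ hendIn hend q hq he


-- ===== VERDICT (by name: the statement is the Claim_ definition above) =====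
theorem solve_spec : Claim_equal_solve := by
  intro mo _ hpre
  show solve mo = solve_alt mo
  exact MinD_unique (solve_minD hpre) (solve_alt_minD hpre)
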